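/- GENERATED by mk_final_copies.py from the proof of the farm's unit `vorbis_decode_packet_rest.4` (farm:vorbis_decode_packet_rest.4.2: Lemmas.lean) as the
   re-elaboration sweep compiled it — do not edit. -/
import Asan.CheckWalk
import Vorbis.Spec.Units.vorbis_decode_packet_rest_4
import Vorbis.Spec.PacketRestFrame
import Vorbis.Spec.PacketRestTest
import Vorbis.Spec.CodebookCarry

open X86 X86.User Asan Vorbis Vorbis.Spec Vorbis.Spec.vorbis_decode_packet_rest

set_option maxRecDepth 4000
set_option maxHeartbeats 4000000

namespace Vorbis.Spec.vorbis_decode_packet_rest_4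

/-- **THE DECODE-TIME INVARIANT OVER ONE ROUND OF THE `k` LOOP** (lines 3252–3261): everything the round (its two callees included)
stores lies in the stack window `[lo, hi)` (inside the stack region), in one of the bit reader's windows of `*f` (`Reader.winsBits`:
`error`, `acc`, `valid_bits` and get8_packet_raw's fields), or in the `finalY` block of channel `c`. Given `Bits` of the new
memory (from the callee's post, or from `Bits.store_valid_bits` / `Bits.store_other` for the inline DECODE), `DecodeInv` holds again:
`DecodeInv.frame_stores` with `Env.eqOn` (no window meets the shadow), `ADO.frame_stores`, `M7Range.transfer`, `W1.transfer`. -/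
theorem seg4_inv_step {others : List Obj} {frames : List (Nat × FrameLayout)} {len : Nat} {Ar : Arena} {stored room : Int}
    {ysz : Nat → Nat} {mem mem' : Mem} {f lo hi c : Nat}
    (h : DecodeInv others frames len Ar stored room ysz mem f)
    (hc : (c : Int) < stb_vorbis.channels mem f)
    (hlo : 0x700000 ≤ lo) (hhi : hi ≤ 0x800000)
    (hs : Mem.SameExcept [⟨lo, hi⟩, ⟨f + 48, f + 56⟩, ⟨f + 84, f + 96⟩, ⟨f + 136, f + 144⟩, ⟨f + 1484, f + 1749⟩,
      ⟨f + 1752, f + 1784⟩, ⟨stb_vorbis.finalY mem f c, stb_vorbis.finalY mem f c + ysz c⟩] mem mem')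
    (hb : Bits (RunBlk Ar len) len mem' f) :
    DecodeInv others frames len Ar stored room ysz mem' f := by
  have hok := h.ok
  have hob := h.ob1
  have hins := hok.inside _ hob
  simp only [vblock, voff] at hins
  obtain ⟨hyb, _⟩ := h.fy c hc
  have hyins := hok.inside _ hyb
  simp only [vblock] at hyins
  have hyobj := h.sep.bufobj _ (SampleBuf.finalY c hc (ysz c) hyb)
  simp only [vblock, voff] at hyobj
  -- every span is a decode-time store
  have hw : ∀ s, s ∈ [(⟨lo, hi⟩ : Span), ⟨f + 48, f + 56⟩, ⟨f + 84, f + 96⟩, ⟨f + 136, f + 144⟩, ⟨f + 1484, f + 1749⟩,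
      ⟨f + 1752, f + 1784⟩, ⟨stb_vorbis.finalY mem f c, stb_vorbis.finalY mem f c + ysz c⟩] →
      StoreOK (RunBlk Ar len) mem f s := by
    intro s hsp
    simp only [List.mem_cons, List.mem_nil_iff, or_false] at hsp
    rcases hsp with rfl | rfl | rfl | rfl | rfl | rfl | rfl
    · apply StoreOK.off
      intro B hB
      have := h.offStack B hB
      simp only []
      omega
    · exact StoreOK.hole (InHole.of_field f 48 8 (by omega))
    · exact StoreOK.hole (InHole.of_field f 84 12 (by omega))
    · exact StoreOK.hole (InHole.of_field f 136 8 (by omega))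
    · exact StoreOK.hole (InHole.of_field f 1484 265 (by omega))
    · exact StoreOK.hole (InHole.of_field f 1752 32 (by omega))
    · exact StoreOK.buffer _ (SampleBuf.finalY c hc (ysz c) hyb) (Nat.le_refl _) (Nat.le_refl _)
  -- where the spans are not: the shadow, the arena fields, the fields W1 and M7 read
  have hmiss : ∀ s, s ∈ [(⟨lo, hi⟩ : Span), ⟨f + 48, f + 56⟩, ⟨f + 84, f + 96⟩, ⟨f + 136, f + 144⟩, ⟨f + 1484, f + 1749⟩,
      ⟨f + 1752, f + 1784⟩, ⟨stb_vorbis.finalY mem f c, stb_vorbis.finalY mem f c + ysz c⟩] →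
      s.hi ≤ 0xC00000 ∧ (s.hi ≤ f ∨ f + 1808 ≤ s.lo ∨ (f + 48 ≤ s.lo ∧ s.hi ≤ f + 56) ∨ (f + 84 ≤ s.lo ∧ s.hi ≤ f + 96) ∨
        (f + 136 ≤ s.lo ∧ s.hi ≤ f + 144) ∨ (f + 1484 ≤ s.lo ∧ s.hi ≤ f + 1749) ∨ (f + 1752 ≤ s.lo ∧ s.hi ≤ f + 1784)) := by
    intro s hsp
    have hst := h.objOff
    simp only [voff] at hst
    simp only [List.mem_cons, List.mem_nil_iff, or_false] at hsp
    rcases hsp with rfl | rfl | rfl | rfl | rfl | rfl | rfl <;> simp only [] <;> omega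
  have henv : Env (RunBlk Ar len) (Asan.Live (stackObjs frames ++ others)) mem' := by
    apply h.fb.env.eqOn
    apply hs.eqOn
    intro w hw'
    have := (hmiss w hw').1
    omega
  have hado : ADO Ar others mem' f := by
    apply h.fb.ado.frame_stores hs (by simp only [voff]; omega)
    · intro s hsp
      have := (hmiss s hsp).2
      omega
    · intro s hsp
      have := (hmiss s hsp).2
      omega
  have h7 : Mdct.M7Range mem' f := by
    apply h.fb.vorbis.buffers.M7.transfer
    apply ObjEq.of_sameExcept hs
    · intro w hw'
      simp only [Mdct.M7Range.wins, List.mem_cons, List.mem_nil_iff, or_false] at hw'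
      rcases hw' with rfl | rfl <;> simp only [] <;> omega
    · intro w hw' s hsp
      have := (hmiss s hsp).2
      simp only [Mdct.M7Range.wins, List.mem_cons, List.mem_nil_iff, or_false] at hw'
      rcases hw' with rfl | rfl <;> simp only [] <;> omega
  have hw1 : W1 mem' f := by
    apply h.fb.vorbis.w1.transfer
    apply ObjEq.of_sameExcept hs
    · intro w hw'
      simp only [W1.wins, List.mem_cons, List.mem_nil_iff, or_false] at hw'
      rcases hw' with rfl | rfl <;> simp only [] <;> omega
    · intro w hw' s hsp
      have := (hmiss s hsp).2
      simp only [W1.wins, List.mem_cons, List.mem_nil_iff, or_false] at hw'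
      rcases hw' with rfl | rfl <;> simp only [] <;> omega
  exact h.frame_stores hs hw henv hado (fun _ => hb) (fun _ => h7) (fun _ => hw1)

/-! ### The assertion family of the proposed sub-segments

`KLoop` is what holds during one round of the `k` loop (everything of `At4` but the address, with the ghost `k`); `AtK` is the loop
head; `AtBook`, `AtDec`, `AtVar`, `AtPut` are the four cut points proposed inside the round. -/

/-- 0x110d5c (`lea rdi,[rbp+0xa8]`, line 3257): the `book >= 0` arm, `bx = book`. Proposed label `cut7a`. -/
abbrev cutBook : Word := 0x110d5c

/-- 0x110d93 (`lea rdi,[rbp+0x6e4]`, line 3258): DECODE #2 after the optional prep_huffman; join of 0x110c9a and 0x110d8d. Proposed label `cut7b`. -/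
abbrev cutDec : Word := 0x110d93

/-- 0x110cad (`lea rdi,[rbx+0x1b]`, line 3258): `r12d = var`; join of 0x110caa, 0x110e16, 0x110e2c. Proposed label `cut7c`. -/
abbrev cutVar : Word := 0x110cad

/-- 0x110ce2 (`mov eax,[rsp+0x8]`, line 3259): `r12w = temp`; join of 0x110cba and 0x110cde. Proposed label `cut7d`. -/
abbrev cutStore : Word := 0x110ce2

/-- **What holds during one round of the `k` loop** (lines 3252–3261), channel `i`, partition `j`, ghost `k`: STABLE ∧ `rbp = f` ∧
`r14d = k ≤ cdim` ∧ the spill slots of `At4` ∧ `offset = 2 + Σ_{j' < j} cdim[pcl[j']] + k`. `[rsp] = cval` is any `int`. -/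
structure KLoop (u₀ : State) (others : List Obj) (frames : List (Nat × FrameLayout)) (len : Nat) (Ar : Arena)
    (stored room : Int) (mode : Nat) (ysz : Nat → Nat) (u : State) (ret : Word)
    (i j k : Nat) (v : State) : Prop
    extends Stable u₀ others frames len Ar stored room mode ysz u ret (lsOf u) v where
  rbp : (v.reg .rbp).toNat = (fOf u)
  r14 : v.reg .r14 = UInt64.ofNat k
  g : IsFloor v.mem (fOf u) (slot64 u v 0x18)
  slot_j : slot32 u v 0x48 = j
  j_lt : j < Floor1.partitions v.mem (slot64 u v 0x18)
  slot_pclass : slot32 u v 0x38 = Floor1.partition_class_list v.mem (slot64 u v 0x18) j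
  slot_cdim : slot32 u v 0x10 = Floor1.class_dimensions v.mem (slot64 u v 0x18) (slot32 u v 0x38)
  k_le : k ≤ slot32 u v 0x10
  slot_cbits : slot32 u v 0x2c = Floor1.class_subclasses v.mem (slot64 u v 0x18) (slot32 u v 0x38)
  slot_csub : slot32 u v 0x30 = 2 ^ slot32 u v 0x2c - 1
  slot_offset : slot32 u v 0x8 = 2 + Floor1.dimSum v.mem (slot64 u v 0x18) j + k
  slot_i : slot32 u v 0x54 = i
  i_lt : (i : Int) < stb_vorbis.channels v.mem (fOf u)
  slot_finalY : slot64 u v 0x20 = stb_vorbis.finalY v.mem (fOf u) i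
  slot_map : slot64 u v 0x58 = mapOf v.mem (fOf u) (mOf u)

/-- **THE INVARIANT OF THE `k` LOOP at its head 0x110d0a** (line 3252): `KLoop` at `cut7`. `At4` is the instance `k = 0`
(`AtK.of_at4`); with `k = cdim` the exit arm 0x110e74 establishes `At3 … (j + 1)` (`Floor1.dimSum_succ`). -/
structure AtK (u₀ : State) (others : List Obj) (frames : List (Nat × FrameLayout)) (len : Nat) (Ar : Arena)
    (stored room : Int) (mode : Nat) (ysz : Nat → Nat) (u : State) (ret : Word)
    (i j k : Nat) (v : State) : Prop
    extends KLoop u₀ others frames len Ar stored room mode ysz u ret i j k v where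
  rip : v.rip = Vorbis.L.vorbis_decode_packet_rest.cut7

/-- **0x110d5c, the `book >= 0` arm** (line 3257), ghost `b` = the book: `KLoop` ∧ `k < cdim` ∧ `rbx = b` (zero-extended `uint16`,
bit 15 clear) ∧ `b < codebook_count` (FL6 on the masked index). -/
structure AtBook (u₀ : State) (others : List Obj) (frames : List (Nat × FrameLayout)) (len : Nat) (Ar : Arena)
    (stored room : Int) (mode : Nat) (ysz : Nat → Nat) (u : State) (ret : Word)
    (i j k b : Nat) (v : State) : Prop
    extends KLoop u₀ others frames len Ar stored room mode ysz u ret i j k v where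
  rip : v.rip = cutBook
  k_lt : k < slot32 u v 0x10
  rbx : v.reg .rbx = UInt64.ofNat b
  b_lt : b < 32768
  book_lt : (b : Int) < stb_vorbis.codebook_count v.mem (fOf u)

/-- **0x110d93, DECODE #2 after the optional prep_huffman** (line 3258): `KLoop` ∧ `k < cdim` ∧ `rbx = c = f->codebooks + b`,
`b < codebook_count`. -/
structure AtDec (u₀ : State) (others : List Obj) (frames : List (Nat × FrameLayout)) (len : Nat) (Ar : Arena)
    (stored room : Int) (mode : Nat) (ysz : Nat → Nat) (u : State) (ret : Word)
    (i j k b : Nat) (v : State) : Prop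
    extends KLoop u₀ others frames len Ar stored room mode ysz u ret i j k v where
  rip : v.rip = cutDec
  k_lt : k < slot32 u v 0x10
  rbx : (v.reg .rbx).toNat = stb_vorbis.codebooks_at v.mem (fOf u) b
  book_lt : (b : Int) < stb_vorbis.codebook_count v.mem (fOf u)

/-- **0x110cad, after the decode proper** (line 3258): as `AtDec`, and `r12d = var` with DecodeRaw: `var = −1 ∨ 0 ≤ var < N(c)`
(from codebook_decode_scalar_raw's post, from K5 on the fast path, `−1` on the fast path's underflow arm). -/
structure AtVar (u₀ : State) (others : List Obj) (frames : List (Nat × FrameLayout)) (len : Nat) (Ar : Arena)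
    (stored room : Int) (mode : Nat) (ysz : Nat → Nat) (u : State) (ret : Word)
    (i j k b : Nat) (v : State) : Prop
    extends KLoop u₀ others frames len Ar stored room mode ysz u ret i j k v where
  rip : v.rip = cutVar
  k_lt : k < slot32 u v 0x10
  rbx : (v.reg .rbx).toNat = stb_vorbis.codebooks_at v.mem (fOf u) b
  book_lt : (b : Int) < stb_vorbis.codebook_count v.mem (fOf u)
  var : DecodeRawResult v.mem (stb_vorbis.codebooks_at v.mem (fOf u) b) (argInt (v.reg .r12))

/-- **0x110ce2, before `finalY[offset++] = temp`** (line 3259): `KLoop` ∧ `k < cdim`; `r12w = temp` is any value. -/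
structure AtPut (u₀ : State) (others : List Obj) (frames : List (Nat × FrameLayout)) (len : Nat) (Ar : Arena)
    (stored room : Int) (mode : Nat) (ysz : Nat → Nat) (u : State) (ret : Word)
    (i j k : Nat) (v : State) : Prop
    extends KLoop u₀ others frames len Ar stored room mode ysz u ret i j k v where
  rip : v.rip = cutStore
  k_lt : k < slot32 u v 0x10

/-- The entry assertion of the segment is the loop invariant with `k = 0`. -/
theorem AtK.of_at4 {u₀ : State} {others : List Obj} {frames : List (Nat × FrameLayout)} {len : Nat} {Ar : Arena}
    {stored room : Int} {mode : Nat} {ysz : Nat → Nat} {u : State} {ret : Word} {i j : Nat} {v : State}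
    (h : At4 u₀ others frames len Ar stored room mode ysz u ret i j v) :
    AtK u₀ others frames len Ar stored room mode ysz u ret i j 0 v where
  toStable := h.toStable
  rip := h.rip
  rbp := h.rbp
  r14 := h.r14
  g := h.g
  slot_j := h.slot_j
  j_lt := h.j_lt
  slot_pclass := h.slot_pclass
  slot_cdim := h.slot_cdim
  k_le := Nat.zero_le _
  slot_cbits := h.slot_cbits
  slot_csub := h.slot_csub
  slot_offset := h.slot_offset
  slot_i := h.slot_i
  i_lt := h.i_lt
  slot_finalY := h.slot_finalY
  slot_map := h.slot_map

/-- **`cdim ≤ 8`** (FL6) during a round: the bound of the measure `cdim − k`. -/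
theorem KLoop.cdim_le {u₀ : State} {others : List Obj} {frames : List (Nat × FrameLayout)} {len : Nat} {Ar : Arena}
    {stored room : Int} {mode : Nat} {ysz : Nat → Nat} {u : State} {ret : Word} {i j k : Nat} {v : State}
    (h : KLoop u₀ others frames len Ar stored room mode ysz u ret i j k v) : slot32 u v 0x10 ≤ 8 := by
  have hfl := (Real.VorbisOK.config h.toStable.toFrame.inv.fb.vorbis).floor.floor h.g
  have hc := hfl.FL6 j h.j_lt
  rw [h.slot_cdim, h.slot_pclass]
  exact hc.dim.2

/-- **The two stack arguments `[rsp + 8, rsp + 24)` of the function's entry state lie inside the stack region.** `AtEntry` gives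
`rsp + 8 ≤ 800000H` only, and the arena may begin at `800000H` (AR1x): with contracts 1 this was missing (the first worker's
CONTRACT-PRE report); contracts 2 have it as `Args.args_top` (from `len_above` / `left_above`), which Proof.lean supplies
(`seg4_argsIn`). The lemmas below take it as the explicit hypothesis `ArgsIn e`. -/
def ArgsIn (u : State) : Prop := (u.reg .rsp).toNat + 24 ≤ 0x800000

/-- **THE LOOP, from one round** (the composition inside the unit): if from every loop head `AtK … k` the machine reaches the next
head `AtK … (k + 1)` or the segment's exit `At3 … (j + 1)`, then the segment's statement holds — UNDER `ArgsIn`. Measure `8 − k`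
(`KLoop.k_le`, `KLoop.cdim_le`). -/
theorem seg4_of_round {Lay : Layout} {μ : Microarch} {u₀ : State}
    (hround : ∀ (others : List Obj) (frames : List (Nat × FrameLayout)) (len : Nat) (Ar : Arena) (stored room : Int)
      (mode : Nat) (ysz : Nat → Nat) (u : State) (ret : Word) (i j k : Nat) (v : State),
      AtK u₀ others frames len Ar stored room mode ysz u ret i j k v → ArgsIn u →
      ReachVia Lay μ Vorbis.WayInv v (fun w => AtK u₀ others frames len Ar stored room mode ysz u ret i j (k + 1) w ∨
        At3 u₀ others frames len Ar stored room mode ysz u ret i (j + 1) w)) :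
    ∀ (others : List Obj) (frames : List (Nat × FrameLayout)) (len : Nat) (Ar : Arena) (stored room : Int)
      (mode : Nat) (ysz : Nat → Nat) (u : State) (ret : Word) (i j : Nat) (v : State),
      At4 u₀ others frames len Ar stored room mode ysz u ret i j v → ArgsIn u →
      ReachVia Lay μ Vorbis.WayInv v (fun w => At3 u₀ others frames len Ar stored room mode ysz u ret i (j + 1) w) := by
  intro others frames len Ar stored room mode ysz u ret i j v hat hin
  have hloop : ∀ (n k : Nat), k + n = 9 → ∀ w, AtK u₀ others frames len Ar stored room mode ysz u ret i j k w →
      ReachVia Lay μ Vorbis.WayInv w (fun w' => At3 u₀ others frames len Ar stored room mode ysz u ret i (j + 1) w') := by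
    intro n
    induction n with
    | zero =>
      intro k hk w hw
      have h1 := hw.k_le
      have h2 := hw.toKLoop.cdim_le
      omega
    | succ n ih =>
      intro k hk w hw
      refine (hround others frames len Ar stored room mode ysz u ret i j k w hw hin).trans ?_
      intro w' hw'
      rcases hw' with hk' | h3
      · exact ih (k + 1) (by omega) w' hk'
      · exact ReachVia.done h3
  exact hloop 9 0 (by omega) v (AtK.of_at4 hat)

/-! ### The frame lemma of the round -/

/-- **What of the configuration a round needs to read the same in the new memory** -/
structure CfgEq (mem mem' : Mem) (f mode g i : Nat) : Prop where
  channels : stb_vorbis.channels mem' f = stb_vorbis.channels mem f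
  finalY : stb_vorbis.finalY mem' f i = stb_vorbis.finalY mem f i
  nOf : nOf mem' f (stb_vorbis.mode_config_at f mode) = nOf mem f (stb_vorbis.mode_config_at f mode)
  mapOf : mapOf mem' f (stb_vorbis.mode_config_at f mode) = mapOf mem f (stb_vorbis.mode_config_at f mode)
  isFloor : IsFloor mem' f g
  floor : (Block.mk g Off.sizeof.Floor).Kept mem mem'
  codebook_count : stb_vorbis.codebook_count mem' f = stb_vorbis.codebook_count mem f
  codebooks : stb_vorbis.codebooks mem' f = stb_vorbis.codebooks mem f

/-- **The configuration reads the same over a batch of decode-time stores** (`StoreOK.decodeSame`, `StoreOK.reads_kept`,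
`ConfigOK.buffers_eq`, `FloorShape.elem_kept`): the values the assertions of the round name in the CURRENT memory. -/
theorem cfgEq_of_stores {others : List Obj} {frames : List (Nat × FrameLayout)} {len : Nat} {Ar : Arena} {stored room : Int}
    {ysz : Nat → Nat} {mem mem' : Mem} {f mode g i : Nat} {spans : List Span}
    (h : DecodeInv others frames len Ar stored room ysz mem f)
    (hi : (i : Int) < stb_vorbis.channels mem f) (hg : IsFloor mem f g)
    (hmode : (mode : Int) < stb_vorbis.mode_count mem f)
    (hs : Mem.SameExcept spans mem mem') (hw : ∀ s, s ∈ spans → StoreOK (RunBlk Ar len) mem f s) :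
    CfgEq mem mem' f mode g i := by
  have hcfg := h.config
  have hok := h.ok
  have hd : DecodeSame f mem mem' := StoreOK.decodeSame hok h.ob1 h.sep hs hw
  have he : ObjEq ConfigOK.wins mem f mem' f := hd.sub ConfigOK.wins_decode
  have hk := StoreOK.reads_kept hcfg hok h.sep hs hw
  have hfk := hk _ ConfigOK.Reads.floor
  obtain ⟨ech, _, eptr⟩ := ConfigOK.buffers_eq he hcfg.header.HD1.2
  have hfl : FloorHdrEq mem f mem' f := FloorHdrEq.of_objEq (he.sub (by decide))
  have hmd := hcfg.mode.MD1
  have e0 : stb_vorbis.blocksize_0 mem' f = stb_vorbis.blocksize_0 mem f := by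
    simp only [vacc, voff]
    exact he.i32 152 (by decide)
  have e1 : stb_vorbis.blocksize_1 mem' f = stb_vorbis.blocksize_1 mem f := by
    simp only [vacc, voff]
    exact he.i32 156 (by decide)
  refine ⟨ech, (eptr i hi).2.2, ?_, ?_, ?_, hcfg.floor.toFloorShape.elem_kept hg hfk, ?_, ?_⟩
  · unfold vorbis_decode_packet_rest.nOf
    have eb : Mode.blockflag mem' (stb_vorbis.mode_config_at f mode) = Mode.blockflag mem (stb_vorbis.mode_config_at f mode) := by
      simp only [vacc, voff]
      exact he.u8_at (484 + 6 * mode) (InWins.of_mem (144, 1000) (by decide) (by simp only []; omega) (by simp only []; omega))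
        (by omega) (by omega)
    rw [eb]
    exact bsize_congr e0 e1 _
  · unfold vorbis_decode_packet_rest.mapOf
    have eb : Mode.mapping mem' (stb_vorbis.mode_config_at f mode) = Mode.mapping mem (stb_vorbis.mode_config_at f mode) := by
      simp only [vacc, voff]
      exact he.u8_at (484 + 6 * mode + 1) (InWins.of_mem (144, 1000) (by decide) (by simp only []; omega) (by simp only []; omega))
        (by omega) (by omega)
    rw [eb]
    simp only [vacc, voff]
    rw [he.u64 472 (by decide)]
  · exact FloorShape.isFloor_frame hfl hg
  · simp only [vacc, voff]
    exact he.i32 160 (by decide)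
  · simp only [vacc, voff]
    exact he.u64 168 (by decide)


/-- A read in the stack region above every stack window of a footprint whose other windows lie off the stack region. -/
theorem stack_keep {ws : List Span} {m m' : Mem} (hs : Mem.SameExcept ws m m') (lo : Nat)
    (hws : ∀ w, w ∈ ws → w.hi ≤ lo ∨ 0x800000 ≤ w.lo) (a : Word) (n : Nat) (h1 : lo ≤ a.toNat)
    (h2 : a.toNat + n ≤ 0x800000) : m'.readLE a n = m.readLE a n := by
  apply hs.readLE a n (by omega)
  intro w hw
  have := hws w hw
  omega

/-- **`KLoop` AFTER A BATCH OF STORES OF THE ROUND** (the one lemma behind every exit assertion of the sub-segments): the stores lie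
below the scratch slot `[rsp + 0xc]` of the own frame, in the bit reader's windows of `*f`, or in the `finalY` block of channel `i`;
`Bits` of the new memory is given; the slot `[rsp + 8]` holds the offset for the new `k'`. Every other slot, the saved registers, the
stack arguments read the same (`stack_keep`), the configuration values follow (`cfgEq_of_stores`), `DecodeInv` by `seg4_inv_step`.
`hargs_in` — the stack arguments lie inside the stack region — is `Args.args_top` of the function's precondition (contracts 2). -/
theorem KLoop.step' {u₀ : State} {others : List Obj} {frames : List (Nat × FrameLayout)} {len : Nat} {Ar : Arena}
    {stored room : Int} {mode : Nat} {ysz : Nat → Nat} {e : State} {ret : Word} {i j k k' : Nat} {v s : State}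
    (h : KLoop u₀ others frames len Ar stored room mode ysz e ret i j k v)
    (he_room : 0x700000 + 3856 ≤ (e.reg .rsp).toNat) (he_top : (e.reg .rsp).toNat + 8 ≤ 0x800000)
    (hargs_in : ArgsIn e)
    (hrsp : s.reg .rsp = spOf e) (hcode : Vorbis.CodeOK u₀ s.mem) (habi : abiInv s)
    (hrbp : (s.reg .rbp).toNat = fOf e) (hr14 : s.reg .r14 = UInt64.ofNat k') (hk' : k' ≤ slot32 e v 0x10)
    (hs : Mem.SameExcept [⟨(e.reg .rsp).toNat - 3856, (e.reg .rsp).toNat - 3000 + 12⟩,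
      ⟨fOf e + 48, fOf e + 56⟩, ⟨fOf e + 84, fOf e + 96⟩, ⟨fOf e + 136, fOf e + 144⟩, ⟨fOf e + 1484, fOf e + 1749⟩,
      ⟨fOf e + 1752, fOf e + 1784⟩,
      ⟨stb_vorbis.finalY v.mem (fOf e) i, stb_vorbis.finalY v.mem (fOf e) i + ysz i⟩] v.mem s.mem)
    (hoff : slot32 e s 0x8 = 2 + Floor1.dimSum v.mem (slot64 e v 0x18) j + k')
    (hb : Bits (RunBlk Ar len) len s.mem (fOf e)) :
    KLoop u₀ others frames len Ar stored room mode ysz e ret i j k' s ∧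
      stb_vorbis.codebooks s.mem (fOf e) = stb_vorbis.codebooks v.mem (fOf e) ∧
      stb_vorbis.codebook_count s.mem (fOf e) = stb_vorbis.codebook_count v.mem (fOf e) ∧
      slot32 e s 0x10 = slot32 e v 0x10 := by
  unfold ArgsIn at hargs_in
  obtain ⟨hsh, hinv0, hargs⟩ := h.pre
  have hinv := h.inv
  have hi := h.i_lt
  -- the round's footprint as ONE stack window, for the invariant
  have hs1 : Mem.SameExcept [⟨(e.reg .rsp).toNat - 3856, (e.reg .rsp).toNat - 3000 + 12⟩,
      ⟨fOf e + 48, fOf e + 56⟩, ⟨fOf e + 84, fOf e + 96⟩, ⟨fOf e + 136, fOf e + 144⟩, ⟨fOf e + 1484, fOf e + 1749⟩,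
      ⟨fOf e + 1752, fOf e + 1784⟩,
      ⟨stb_vorbis.finalY v.mem (fOf e) i, stb_vorbis.finalY v.mem (fOf e) i + ysz i⟩] v.mem s.mem := hs
  have hinv' := seg4_inv_step hinv hi (by omega) (by omega) hs1 hb
  have hcfg0 := hinv.config
  -- every span is a decode-time store; the configuration reads the same
  have hok := hinv.ok
  have hyb := (hinv.fy i hi).1
  have hyoff := hinv.offStack _ hyb
  simp only [] at hyoff
  have hfoff := hinv.objOff
  simp only [voff] at hfoff
  -- the configuration at the loop head reads as at the function's entry (the carried footprint)
  have hd0 : DecodeSame (fOf e) e.mem v.mem :=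
    StoreOK.decodeSame hinv0.ok hinv0.ob1 hinv0.sep h.same (fun w hw => footprint_storeOK h.pre he_room w hw)
  have he0 : ObjEq ConfigOK.wins e.mem (fOf e) v.mem (fOf e) := hd0.sub ConfigOK.wins_decode
  obtain ⟨ech0, _, eptr0⟩ := ConfigOK.buffers_eq he0 hinv0.config.header.HD1.2
  have hi0 : (i : Int) < stb_vorbis.channels e.mem (fOf e) := by
    rw [← ech0]
    exact hi
  have ey0 : stb_vorbis.finalY v.mem (fOf e) i = stb_vorbis.finalY e.mem (fOf e) i := (eptr0 i hi0).2.2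
  have hmode : (mode : Int) < stb_vorbis.mode_count v.mem (fOf e) := by
    have e1 : stb_vorbis.mode_count v.mem (fOf e) = stb_vorbis.mode_count e.mem (fOf e) := by
      simp only [vacc, voff]
      exact he0.i32 480 (by decide)
    rw [e1]
    exact hargs.mode_lt
  have hw : ∀ w, w ∈ [(⟨(e.reg .rsp).toNat - 3856, (e.reg .rsp).toNat - 3000 + 12⟩ : Span),
      ⟨fOf e + 48, fOf e + 56⟩, ⟨fOf e + 84, fOf e + 96⟩, ⟨fOf e + 136, fOf e + 144⟩, ⟨fOf e + 1484, fOf e + 1749⟩,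
      ⟨fOf e + 1752, fOf e + 1784⟩,
      ⟨stb_vorbis.finalY v.mem (fOf e) i, stb_vorbis.finalY v.mem (fOf e) i + ysz i⟩] →
      StoreOK (RunBlk Ar len) v.mem (fOf e) w := by
    intro w hsp
    simp only [List.mem_cons, List.mem_nil_iff, or_false] at hsp
    rcases hsp with rfl | rfl | rfl | rfl | rfl | rfl | rfl
    · apply StoreOK.off
      intro B hB
      have := hinv.offStack B hB
      simp only []
      omega
    · exact StoreOK.hole (InHole.of_field _ 48 8 (by omega))
    · exact StoreOK.hole (InHole.of_field _ 84 12 (by omega))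
    · exact StoreOK.hole (InHole.of_field _ 136 8 (by omega))
    · exact StoreOK.hole (InHole.of_field _ 1484 265 (by omega))
    · exact StoreOK.hole (InHole.of_field _ 1752 32 (by omega))
    · exact StoreOK.buffer _ (SampleBuf.finalY i hi (ysz i) hyb) (Nat.le_refl _) (Nat.le_refl _)
  have hcf := cfgEq_of_stores (mode := mode) hinv hi h.g hmode hs hw
  -- the stack above the two scratch slots reads the same
  have hws : ∀ w, w ∈ [(⟨(e.reg .rsp).toNat - 3856, (e.reg .rsp).toNat - 3000 + 12⟩ : Span),
      ⟨fOf e + 48, fOf e + 56⟩, ⟨fOf e + 84, fOf e + 96⟩, ⟨fOf e + 136, fOf e + 144⟩, ⟨fOf e + 1484, fOf e + 1749⟩,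
      ⟨fOf e + 1752, fOf e + 1784⟩,
      ⟨stb_vorbis.finalY v.mem (fOf e) i, stb_vorbis.finalY v.mem (fOf e) i + ysz i⟩] →
      w.hi ≤ (e.reg .rsp).toNat - 3000 + 12 ∨ 0x800000 ≤ w.lo := by
    intro w hsp
    simp only [List.mem_cons, List.mem_nil_iff, or_false] at hsp
    rcases hsp with rfl | rfl | rfl | rfl | rfl | rfl | rfl <;> simp only [] <;> omega
  have keep : ∀ (a : Word) (n : Nat), (e.reg .rsp).toNat - 3000 + 12 ≤ a.toNat → a.toNat + n ≤ 0x800000 →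
      s.mem.readLE a n = v.mem.readLE a n :=
    fun a n h1 h2 => stack_keep hs _ hws a n h1 h2
  have hm : mOf e = stb_vorbis.mode_config_at (fOf e) mode := hargs.m_eq
  have eg : slot64 e s 0x18 = slot64 e v 0x18 := keep _ 8 (by u_omega) (by u_omega)
  have epc : slot32 e s 0x38 = slot32 e v 0x38 := keep _ 4 (by u_omega) (by u_omega)
  have ecd : slot32 e s 0x10 = slot32 e v 0x10 := keep _ 4 (by u_omega) (by u_omega)
  have ecb : slot32 e s 0x2c = slot32 e v 0x2c := keep _ 4 (by u_omega) (by u_omega)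
  have hfk := hcf.floor
  have hpl := Floor1.partition_class_list_lt v.mem (slot64 e v 0x18) j
  have hj256 : j < 256 := by
    have h1 := Floor1.partitions_lt v.mem (slot64 e v 0x18)
    have h2 := h.j_lt
    omega
  refine ⟨⟨⟨?frame, ?slot_f, ?slot_len, ?slot_m, ?slot_ls, ?slot_rs, ?slot_n, ?slot_n2, ?slot_sb, ?arg_re, ?arg_left,
    ?left_val⟩, hrbp, hr14, ?g, ?slot_j, ?j_lt, ?slot_pclass, ?slot_cdim, ?k_le, ?slot_cbits, ?slot_csub, ?slot_offset,
    ?slot_i, ?i_lt, ?slot_finalY, ?slot_map⟩, hcf.codebooks, hcf.codebook_count, ecd⟩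
  case frame =>
    refine ⟨h.entry, h.pre, hrsp, hcode, habi, ?_, ?_, ?_, ?_, ?_, ?_, ?_, ?_, ?_, hinv'⟩
    · -- the function's footprint so far
      apply h.same.step_same hs
      intro w hw a h1 h2
      apply covered_footprint
      simp only [List.mem_cons, List.mem_nil_iff, or_false] at hw
      rcases hw with rfl | rfl | rfl | rfl | rfl | rfl | rfl
      · left
        simp only [] at h1 h2
        omega
      · right; left
        exact ⟨⟨fOf e + 48, fOf e + 56⟩, by simp only [holes, List.mem_cons, true_or], h1, h2⟩
      · right; left
        refine ⟨⟨fOf e + 80, fOf e + 112⟩, by simp only [holes, List.mem_cons, true_or, or_true], ?_, ?_⟩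
        · simp only [] at h1 ⊢
          omega
        · simp only [] at h2 ⊢
          omega
      · right; left
        refine ⟨⟨fOf e + 132, fOf e + 144⟩, by simp only [holes, List.mem_cons, true_or, or_true], ?_, ?_⟩
        · simp only [] at h1 ⊢
          omega
        · simp only [] at h2 ⊢
          omega
      · right; left
        refine ⟨⟨fOf e + 1480, fOf e + 1808⟩, by simp only [holes, List.mem_cons, List.mem_nil_iff, true_or, or_true], ?_, ?_⟩
        · simp only [] at h1 ⊢
          omega
        · simp only [] at h2 ⊢
          omega
      · right; left
        refine ⟨⟨fOf e + 1480, fOf e + 1808⟩, by simp only [holes, List.mem_cons, List.mem_nil_iff, true_or, or_true], ?_, ?_⟩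
        · simp only [] at h1 ⊢
          omega
        · simp only [] at h2 ⊢
          omega
      · right; right; left
        refine ⟨i, ?_, ?_, ?_⟩
        · unfold nchan
          omega
        · rw [← ey0]
          exact h1
        · rw [← ey0]
          exact h2
    · rw [keep _ 8 (by u_omega) (by u_omega)]
      exact h.ra
    · rw [keep _ 8 (by u_omega) (by u_omega)]
      exact h.s_r15
    · rw [keep _ 8 (by u_omega) (by u_omega)]
      exact h.s_r14
    · rw [keep _ 8 (by u_omega) (by u_omega)]
      exact h.s_r13
    · rw [keep _ 8 (by u_omega) (by u_omega)]
      exact h.s_r12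
    · rw [keep _ 8 (by u_omega) (by u_omega)]
      exact h.s_rbp
    · rw [keep _ 8 (by u_omega) (by u_omega)]
      exact h.s_rbx
    · -- the shadow layer: no window meets the shadow
      apply h.shadow.untouched
      apply hs.eqOn
      intro w hw
      have hins := hok.inside _ hinv.ob1
      have hyins := hok.inside _ hyb
      simp only [vblock, voff] at hins hyins
      simp only [List.mem_cons, List.mem_nil_iff, or_false] at hw
      rcases hw with rfl | rfl | rfl | rfl | rfl | rfl | rfl <;> simp only [] <;> omega
  case slot_f =>
    have e1 : slot64 e s 0x40 = slot64 e v 0x40 := keep _ 8 (by u_omega) (by u_omega)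
    rw [e1]
    exact h.slot_f
  case slot_len =>
    have e1 : slot64 e s 0x68 = slot64 e v 0x68 := keep _ 8 (by u_omega) (by u_omega)
    rw [e1]
    exact h.slot_len
  case slot_m =>
    have e1 : slot64 e s 0x70 = slot64 e v 0x70 := keep _ 8 (by u_omega) (by u_omega)
    rw [e1]
    exact h.slot_m
  case slot_ls =>
    have e1 : slot32 e s 0x78 = slot32 e v 0x78 := keep _ 4 (by u_omega) (by u_omega)
    rw [e1]
    exact h.slot_ls
  case slot_rs =>
    have e1 : slot32 e s 0x7c = slot32 e v 0x7c := keep _ 4 (by u_omega) (by u_omega)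
    rw [e1]
    exact h.slot_rs
  case slot_n =>
    have e1 : slot32 e s 0x50 = slot32 e v 0x50 := keep _ 4 (by u_omega) (by u_omega)
    rw [e1, hm, hcf.nOf, ← hm]
    exact h.slot_n
  case slot_n2 =>
    have e1 : slot32 e s 0x3c = slot32 e v 0x3c := keep _ 4 (by u_omega) (by u_omega)
    rw [e1, hm, hcf.nOf, ← hm]
    exact h.slot_n2
  case slot_sb =>
    have e1 : slot64 e s 0x60 = slot64 e v 0x60 := keep _ 8 (by u_omega) (by u_omega)
    rw [e1]
    exact h.slot_sb
  case arg_re =>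
    rw [keep _ 4 (by u_omega) (by u_omega)]
    exact h.arg_re
  case arg_left =>
    rw [keep _ 8 (by u_omega) (by u_omega)]
    exact h.arg_left
  case left_val =>
    have hlw := hargs.left_obj.1.where_ hsh.inv hsh.offText (by decide)
    have hl1 := hargs.left_obj.2
    have ea : (addr (pLeftOf e)).toNat = pLeftOf e := toNat_addr _ (by omega)
    have e1 : s.mem.i32 (pLeftOf e) = v.mem.i32 (pLeftOf e) := by
      unfold Mem.i32 Mem.u32
      rw [keep (addr (pLeftOf e)) 4 (by omega) (by omega)]
    rw [e1]
    exact h.left_val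
  case g =>
    rw [eg]
    exact hcf.isFloor
  case slot_j =>
    have e1 : slot32 e s 0x48 = slot32 e v 0x48 := keep _ 4 (by u_omega) (by u_omega)
    rw [e1]
    exact h.slot_j
  case j_lt =>
    rw [eg, Floor1.same_partitions hfk.same hfk.inside]
    exact h.j_lt
  case slot_pclass =>
    rw [epc, eg, Floor1.same_partition_class_list hfk.same hfk.inside j hj256]
    exact h.slot_pclass
  case slot_cdim =>
    rw [ecd, epc, eg, Floor1.same_class_dimensions hfk.same hfk.inside _ (by rw [h.slot_pclass]; exact hpl)]
    exact h.slot_cdim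
  case k_le =>
    rw [ecd]
    exact hk'
  case slot_cbits =>
    rw [ecb, epc, eg, Floor1.same_class_subclasses hfk.same hfk.inside _ (by rw [h.slot_pclass]; exact hpl)]
    exact h.slot_cbits
  case slot_csub =>
    have e1 : slot32 e s 0x30 = slot32 e v 0x30 := keep _ 4 (by u_omega) (by u_omega)
    rw [e1, ecb]
    exact h.slot_csub
  case slot_offset =>
    rw [hoff, eg, Floor1.same_dimSum hfk.same hfk.inside j (by omega)]
  case slot_i =>
    have e1 : slot32 e s 0x54 = slot32 e v 0x54 := keep _ 4 (by u_omega) (by u_omega)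
    rw [e1]
    exact h.slot_i
  case i_lt =>
    rw [hcf.channels]
    exact hi
  case slot_finalY =>
    have e1 : slot64 e s 0x20 = slot64 e v 0x20 := keep _ 8 (by u_omega) (by u_omega)
    rw [e1, hcf.finalY]
    exact h.slot_finalY
  case slot_map =>
    have e1 : slot64 e s 0x58 = slot64 e v 0x58 := keep _ 8 (by u_omega) (by u_omega)
    rw [e1, hm, hcf.mapOf, ← hm]
    exact h.slot_map


/-! ### The proposed sub-segments and their composition -/

/-- **Sub-segment A, 0x110d0a–0x110d56 + 0x110e31–0x110e56 + 0x110d06 + 0x110e74–0x110e79** (26 + 10 + 1 + 2 instructions; checks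
0x110d3a, 0x110e46): the loop test; `k ≥ cdim` → `++j` → .3; `book = subclass_books[pclass][cval & csub]`, `cval >>= cbits`;
`book < 0` → `finalY[offset++] = 0`, `++k` → the loop head; otherwise → `AtBook`. -/
def SegA (Lay : Layout) (μ : Microarch) (u₀ : State) : Prop :=
  ∀ (others : List Obj) (frames : List (Nat × FrameLayout)) (len : Nat) (Ar : Arena) (stored room : Int)
      (mode : Nat) (ysz : Nat → Nat) (u : State) (ret : Word) (i j k : Nat) (v : State),
    AtK u₀ others frames len Ar stored room mode ysz u ret i j k v → ArgsIn u →
    ReachVia Lay μ Vorbis.WayInv v (fun w => At3 u₀ others frames len Ar stored room mode ysz u ret i (j + 1) w ∨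
      AtK u₀ others frames len Ar stored room mode ysz u ret i j (k + 1) w ∨
      ∃ b, AtBook u₀ others frames len Ar stored room mode ysz u ret i j k b w)

/-- **Sub-segment B, 0x110d5c–0x110d8d + 0x110c92–0x110c9a** (9 + 3 instructions; checks 0x110d63, 0x110d81; call prep_huffman):
`c = f->codebooks + book`; `valid_bits ≤ 9` → prep_huffman → `AtDec`. -/
def SegB (Lay : Layout) (μ : Microarch) (u₀ : State) : Prop :=
  ∀ (others : List Obj) (frames : List (Nat × FrameLayout)) (len : Nat) (Ar : Arena) (stored room : Int)
      (mode : Nat) (ysz : Nat → Nat) (u : State) (ret : Word) (i j k b : Nat) (v : State),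
    AtBook u₀ others frames len Ar stored room mode ysz u ret i j k b v → ArgsIn u →
    ReachVia Lay μ Vorbis.WayInv v (fun w => AtDec u₀ others frames len Ar stored room mode ysz u ret i j k b w)

/-- **Sub-segment C, 0x110d93–0x110e2c + 0x110c9f–0x110caa** (30 + 4 instructions; checks 0x110d9a, 0x110db8, 0x110dd3, 0x110de3,
0x110e02; call codebook_decode_scalar_raw): the fast-huffman lookup; negative → codebook_decode_scalar_raw; otherwise `acc >>= len`,
`valid_bits -= len`, underflow → `valid_bits = 0`, `var = −1` → `AtVar`. -/
def SegC (Lay : Layout) (μ : Microarch) (u₀ : State) : Prop :=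
  ∀ (others : List Obj) (frames : List (Nat × FrameLayout)) (len : Nat) (Ar : Arena) (stored room : Int)
      (mode : Nat) (ysz : Nat → Nat) (u : State) (ret : Word) (i j k b : Nat) (v : State),
    AtDec u₀ others frames len Ar stored room mode ysz u ret i j k b v → ArgsIn u →
    ReachVia Lay μ Vorbis.WayInv v (fun w => AtVar u₀ others frames len Ar stored room mode ysz u ret i j k b w)

/-- **Sub-segment D, 0x110cad–0x110cde** (12 instructions; checks 0x110cb1, 0x110cc3, 0x110cd9; no store): `c->sparse` →
`var = c->sorted_values[var]` (slot −1 for `var = −1`: K4) → `AtPut`. -/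
def SegD (Lay : Layout) (μ : Microarch) (u₀ : State) : Prop :=
  ∀ (others : List Obj) (frames : List (Nat × FrameLayout)) (len : Nat) (Ar : Arena) (stored room : Int)
      (mode : Nat) (ysz : Nat → Nat) (u : State) (ret : Word) (i j k b : Nat) (v : State),
    AtVar u₀ others frames len Ar stored room mode ysz u ret i j k b v → ArgsIn u →
    ReachVia Lay μ Vorbis.WayInv v (fun w => AtPut u₀ others frames len Ar stored room mode ysz u ret i j k w)

/-- **Sub-segment E, 0x110ce2–0x110d06** (10 instructions; check 0x110cf8): `finalY[offset++] = temp`, `++k` → the loop head. -/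
def SegE (Lay : Layout) (μ : Microarch) (u₀ : State) : Prop :=
  ∀ (others : List Obj) (frames : List (Nat × FrameLayout)) (len : Nat) (Ar : Arena) (stored room : Int)
      (mode : Nat) (ysz : Nat → Nat) (u : State) (ret : Word) (i j k : Nat) (v : State),
    AtPut u₀ others frames len Ar stored room mode ysz u ret i j k v → ArgsIn u →
    ReachVia Lay μ Vorbis.WayInv v (fun w => AtK u₀ others frames len Ar stored room mode ysz u ret i j (k + 1) w)

/-- **THE COMPOSITION OF THE FIVE SUB-SEGMENTS**: they give the statement of segment .4, under `ArgsIn`. -/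
theorem seg4_of_parts {Lay : Layout} {μ : Microarch} {u₀ : State} (hA : SegA Lay μ u₀) (hB : SegB Lay μ u₀)
    (hC : SegC Lay μ u₀) (hD : SegD Lay μ u₀) (hE : SegE Lay μ u₀) :
    ∀ (others : List Obj) (frames : List (Nat × FrameLayout)) (len : Nat) (Ar : Arena) (stored room : Int)
      (mode : Nat) (ysz : Nat → Nat) (u : State) (ret : Word) (i j : Nat) (v : State),
      At4 u₀ others frames len Ar stored room mode ysz u ret i j v → ArgsIn u →
      ReachVia Lay μ Vorbis.WayInv v (fun w => At3 u₀ others frames len Ar stored room mode ysz u ret i (j + 1) w) := by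
  apply seg4_of_round
  intro others frames len Ar stored room mode ysz u ret i j k v hk hin
  refine (hA others frames len Ar stored room mode ysz u ret i j k v hk hin).trans ?_
  intro w hw
  rcases hw with h3 | hk' | ⟨b, hb⟩
  · exact ReachVia.done (Or.inr h3)
  · exact ReachVia.done (Or.inl hk')
  · refine (hB others frames len Ar stored room mode ysz u ret i j k b w hb hin).trans ?_
    intro w1 h1
    refine (hC others frames len Ar stored room mode ysz u ret i j k b w1 h1 hin).trans ?_
    intro w2 h2
    refine (hD others frames len Ar stored room mode ysz u ret i j k b w2 h2 hin).trans ?_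
    intro w3 h3
    refine (hE others frames len Ar stored room mode ysz u ret i j k w3 h3 hin).trans ?_
    intro w4 h4
    exact ReachVia.done (Or.inl h4)

/-- `KLoop.step'` without the extras. -/
theorem KLoop.step {u₀ : State} {others : List Obj} {frames : List (Nat × FrameLayout)} {len : Nat} {Ar : Arena}
    {stored room : Int} {mode : Nat} {ysz : Nat → Nat} {e : State} {ret : Word} {i j k k' : Nat} {v s : State}
    (h : KLoop u₀ others frames len Ar stored room mode ysz e ret i j k v)
    (he_room : 0x700000 + 3856 ≤ (e.reg .rsp).toNat) (he_top : (e.reg .rsp).toNat + 8 ≤ 0x800000)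
    (hargs_in : ArgsIn e)
    (hrsp : s.reg .rsp = spOf e) (hcode : Vorbis.CodeOK u₀ s.mem) (habi : abiInv s)
    (hrbp : (s.reg .rbp).toNat = fOf e) (hr14 : s.reg .r14 = UInt64.ofNat k') (hk' : k' ≤ slot32 e v 0x10)
    (hs : Mem.SameExcept [⟨(e.reg .rsp).toNat - 3856, (e.reg .rsp).toNat - 3000 + 12⟩,
      ⟨fOf e + 48, fOf e + 56⟩, ⟨fOf e + 84, fOf e + 96⟩, ⟨fOf e + 136, fOf e + 144⟩, ⟨fOf e + 1484, fOf e + 1749⟩,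
      ⟨fOf e + 1752, fOf e + 1784⟩,
      ⟨stb_vorbis.finalY v.mem (fOf e) i, stb_vorbis.finalY v.mem (fOf e) i + ysz i⟩] v.mem s.mem)
    (hoff : slot32 e s 0x8 = 2 + Floor1.dimSum v.mem (slot64 e v 0x18) j + k')
    (hb : Bits (RunBlk Ar len) len s.mem (fOf e)) :
    KLoop u₀ others frames len Ar stored room mode ysz e ret i j k' s :=
  (h.step' he_room he_top hargs_in hrsp hcode habi hrbp hr14 hk' hs hoff hb).1

/-! ### Sub-segment D -/




/-! ### The spill slots' addresses: `steady rsp + off` in the walker's normal form `entry rsp − k`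

Closed facts over a `Word` variable (`bv_decide` inside a walk context would abstract the whole context). -/

/-- `[rsp + 0x8]` of the steady frame is `[entry rsp − 2992]`. -/
theorem seg4_sp_8 (w : Word) : w - 3000 + 0x8 = w - 2992 := by
  bv_decide

/-- `[rsp + 0x10]` of the steady frame is `[entry rsp − 2984]`. -/
theorem seg4_sp_10 (w : Word) : w - 3000 + 0x10 = w - 2984 := by
  bv_decide

/-- `[rsp + 0x18]` of the steady frame is `[entry rsp − 2976]`. -/
theorem seg4_sp_18 (w : Word) : w - 3000 + 0x18 = w - 2976 := by
  bv_decide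

/-- `[rsp + 0x20]` of the steady frame is `[entry rsp − 2968]`. -/
theorem seg4_sp_20 (w : Word) : w - 3000 + 0x20 = w - 2968 := by
  bv_decide

/-- `[rsp + 0x2c]` of the steady frame is `[entry rsp − 2956]`. -/
theorem seg4_sp_2c (w : Word) : w - 3000 + 0x2c = w - 2956 := by
  bv_decide

/-- `[rsp + 0x30]` of the steady frame is `[entry rsp − 2952]`. -/
theorem seg4_sp_30 (w : Word) : w - 3000 + 0x30 = w - 2952 := by
  bv_decide

/-- `[rsp + 0x38]` of the steady frame is `[entry rsp − 2944]`. -/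
theorem seg4_sp_38 (w : Word) : w - 3000 + 0x38 = w - 2944 := by
  bv_decide

/-- `[rsp + 0x48]` of the steady frame is `[entry rsp − 2928]`. -/
theorem seg4_sp_48 (w : Word) : w - 3000 + 0x48 = w - 2928 := by
  bv_decide

/-- `shl r64, 2` is the multiplication by 4. -/
theorem shl2_eq_mul4 (w : UInt64) : w <<< 2 = w * 4 := by
  bv_decide

/-- **The machine address of DECODE's translation load** `movsxd r12, r12d ; shl r12, 2 ; add r12, [rbx + 0x838]`, for `var ≥ −1`:
the number address `(sorted_values − 4) + 4·(var + 1)` of `Codebook.site_sortedValue` (`addr_add_word_mul4`). -/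
theorem sv_addr (x : Word) (sv : Nat) (hv : -1 ≤ argInt x) (hsv : 4 ≤ sv) :
    Word.ofBV (BitVec.signExtend 64 (Word.part .w32 x)) <<< 2 + UInt64.ofNat sv
      = addr (sv - 4 + 4 * (argInt x + 1).toNat) := by
  rw [ofBV_signExtend64, part32_toInt, shl2_eq_mul4, UInt64.add_comm]
  exact addr_add_word_mul4 sv _ hv hsv



/-- **`KLoop` after stores BELOW THE STEADY STACK POINTER only** (the return addresses of check calls): nothing of the round changed. -/
theorem KLoop.stackOnly' {u₀ : State} {others : List Obj} {frames : List (Nat × FrameLayout)} {len : Nat} {Ar : Arena}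
    {stored room : Int} {mode : Nat} {ysz : Nat → Nat} {e : State} {ret : Word} {i j k : Nat} {v s : State}
    (h : KLoop u₀ others frames len Ar stored room mode ysz e ret i j k v)
    (he_room : 0x700000 + 3856 ≤ (e.reg .rsp).toNat) (he_top : (e.reg .rsp).toNat + 8 ≤ 0x800000)
    (hargs_in : ArgsIn e)
    (hrsp : s.reg .rsp = spOf e) (hcode : Vorbis.CodeOK u₀ s.mem) (habi : abiInv s)
    (hrbp : s.reg .rbp = v.reg .rbp) (hr14 : s.reg .r14 = v.reg .r14)
    (hs : Mem.SameExcept [⟨(e.reg .rsp).toNat - 3856, (e.reg .rsp).toNat - 3000⟩] v.mem s.mem) :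
    KLoop u₀ others frames len Ar stored room mode ysz e ret i j k s ∧
      stb_vorbis.codebooks s.mem (fOf e) = stb_vorbis.codebooks v.mem (fOf e) ∧
      stb_vorbis.codebook_count s.mem (fOf e) = stb_vorbis.codebook_count v.mem (fOf e) ∧
      slot32 e s 0x10 = slot32 e v 0x10 := by
  have hfoff := h.inv.objOff
  simp only [voff] at hfoff
  have hb : Bits (RunBlk Ar len) len s.mem (fOf e) :=
    Reader.bits_of_window h.inv.fb.vorbis.bits hs (by omega)
  apply h.step' he_room he_top hargs_in hrsp hcode habi (by rw [hrbp]; exact h.rbp) (by rw [hr14]; exact h.r14) h.k_le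
    _ _ hb
  · apply hs.mono
    intro w hw a h1 h2
    have e1 : w = ⟨(e.reg .rsp).toNat - 3856, (e.reg .rsp).toNat - 3000⟩ := List.mem_singleton.mp hw
    subst e1
    refine ⟨_, List.mem_cons_self, ?_, ?_⟩
    · exact h1
    · simp only [] at h2 ⊢
      omega
  · have e1 : slot32 e s 0x8 = slot32 e v 0x8 := by
      apply hs.readLE _ 4 (by u_omega)
      intro w hw
      have e1 : w = ⟨(e.reg .rsp).toNat - 3856, (e.reg .rsp).toNat - 3000⟩ := List.mem_singleton.mp hw
      subst e1
      simp only []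
      u_omega
    rw [e1]
    exact h.slot_offset


/-- `KLoop.stackOnly'` without the extras. -/
theorem KLoop.stackOnly {u₀ : State} {others : List Obj} {frames : List (Nat × FrameLayout)} {len : Nat} {Ar : Arena}
    {stored room : Int} {mode : Nat} {ysz : Nat → Nat} {e : State} {ret : Word} {i j k : Nat} {v s : State}
    (h : KLoop u₀ others frames len Ar stored room mode ysz e ret i j k v)
    (he_room : 0x700000 + 3856 ≤ (e.reg .rsp).toNat) (he_top : (e.reg .rsp).toNat + 8 ≤ 0x800000)
    (hargs_in : ArgsIn e)
    (hrsp : s.reg .rsp = spOf e) (hcode : Vorbis.CodeOK u₀ s.mem) (habi : abiInv s)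
    (hrbp : s.reg .rbp = v.reg .rbp) (hr14 : s.reg .r14 = v.reg .r14)
    (hs : Mem.SameExcept [⟨(e.reg .rsp).toNat - 3856, (e.reg .rsp).toNat - 3000⟩] v.mem s.mem) :
    KLoop u₀ others frames len Ar stored room mode ysz e ret i j k s :=
  (h.stackOnly' he_room he_top hargs_in hrsp hcode habi hrbp hr14 hs).1

/-- The slot `[rsp + 0x10] = cdim` over stores below the steady stack pointer. -/
theorem cdim_keep_stack {e v s : State} (he_room : 0x700000 + 3856 ≤ (e.reg .rsp).toNat)
    (he_top : (e.reg .rsp).toNat + 8 ≤ 0x800000)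
    (hs : Mem.SameExcept [⟨(e.reg .rsp).toNat - 3856, (e.reg .rsp).toNat - 3000⟩] v.mem s.mem) :
    slot32 e s 0x10 = slot32 e v 0x10 := by
  apply hs.readLE _ 4 (by u_omega)
  intro w hw
  have e1 : w = ⟨(e.reg .rsp).toNat - 3856, (e.reg .rsp).toNat - 3000⟩ := List.mem_singleton.mp hw
  subst e1
  simp only []
  u_omega

/-- **Sub-segment D, PROVED (under `ArgsIn`)**: 0x110cad–0x110cde, three check sites (`c->sparse`, `c->sorted_values`,
`sorted_values[var]` with the sentinel slot for `var = −1`: `Codebook.site_sortedValue`), no store but the checks' return addresses. -/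
theorem segD {Lay : Layout} (hLay : Lay.hi = 0x1000000) {μ : Microarch} (hμ : UserX.MicroOK μ) {u₀ : State}
    (hcode : HasCodeNat Lay u₀ Vorbis.L.vorbis_decode_packet_rest.entry Vorbis.Code.code_vorbis_decode_packet_rest.nat Vorbis.L.vorbis_decode_packet_rest.size)
    (hl1 : Asan.SmallCheck Lay μ Vorbis.WayInv (Vorbis.CodeOK u₀) [.rax, .rdx] 1 Vorbis.L.__asan_load1_noabort.entry)
    (hl8 : Asan.SmallCheck Lay μ Vorbis.WayInv (Vorbis.CodeOK u₀) [.rax, .rcx, .rdx] 8 Vorbis.L.__asan_load8_noabort.entry)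
    (hl4 : Asan.SmallCheck Lay μ Vorbis.WayInv (Vorbis.CodeOK u₀) [.rax, .rcx, .rdx] 4 Vorbis.L.__asan_load4_noabort.entry) :
    SegD Lay μ u₀ := by
  intro others frames len Ar stored room mode ysz e ret i j k b v hat hin
  have he := hat.entry
  v_entry he
  have w_rip := hat.rip
  have w_rsp : v.reg .rsp = e.reg .rsp - 3000 := hat.rsp
  have hrsp_v : v.reg .rsp = e.reg .rsp - 3000 := hat.rsp
  have w_eq : Mem.EqOn Vorbis.L.textLo Vorbis.L.textHi u₀.mem v.mem := hat.code
  have hdf : v.flags .df = false := (show abiInv _ from hat.abi).1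
  have hmx : v.mxcsr &&& 0x1F80 = 0x1F80 := (show abiInv _ from hat.abi).2
  have hsse := Vorbis.sseOK_of_abiInv hat.abi
  -- the codebook
  obtain ⟨c, hc⟩ : ∃ c : Nat, stb_vorbis.codebooks_at v.mem (fOf e) b = c := ⟨_, rfl⟩
  have hrbxn : (v.reg .rbx).toNat = c := by rw [hat.rbx, hc]
  have hrbx : v.reg .rbx = addr c := eq_addr _ _ hrbxn
  have hinv := hat.inv
  have hcb := hinv.fb.vorbis.codebooks
  obtain ⟨B, hB, hBin⟩ := CodebooksUpTo.book_in (groups_laws len) hcb hat.book_lt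
  rw [hc] at hBin
  have hcok : CodebookOK (RunBlk Ar len) v.mem c := by
    have := hcb.ok b (by have := hat.book_lt; omega)
    rw [hc] at this
    exact this
  have hvar := hat.var
  rw [hc] at hvar
  -- where the struct is: in the data space, off the stack region
  have hBoff := hinv.offStack B hB
  have hBins := hinv.ok.inside B hB
  simp only [vblock, voff] at hBin hBins
  have hcw : c + 2120 ≤ 0xC00000 ∧ (c + 2120 ≤ 0x700000 ∨ 0x800000 ≤ c) := by omega
  have r1b : v.mem.readLE (addr c + 0x1b) 1 = Codebook.sparse v.mem c := by simp only [vfield, vacc, voff]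
  have r838 : v.mem.readLE (addr c + 0x838) 8 = Codebook.sorted_values v.mem c := by simp only [vfield, vacc, voff]
  have hL := hinv.live
  u_walk hcode [hμ.vendor] until [cutStore] span [Vorbis.L.textLo, Vorbis.L.textHi] side (v_side)
  · -- 0x110cb1: load1 c + 0x1b (`c->sparse`)
    have hun : ShadowUntouched v.mem s_110cb1.mem := by v_untouched
    have hs := Codebook.site_field hL hB (by simp only [vblock, voff]; exact hBin) 27 1 (by simp only [voff]; omega)
      (by omega) (a := c + 27) rfl
    exact check_site hat.shadow hun hs (by u_omega)
  · -- 0x110cc3: load8 c + 0x838 (`c->sorted_values`)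
    have hun : ShadowUntouched v.mem s_110cc3.mem := by v_untouched
    have hs := Codebook.site_field hL hB (by simp only [vblock, voff]; exact hBin) 2104 8 (by simp only [voff]; omega)
      (by omega) (a := c + 2104) rfl
    exact check_site hat.shadow hun hs (by u_omega)
  · -- 0x110cd9: load4 sorted_values + 4·sext(var), `var ≥ −1` (K4: the sentinel slot)
    have hun : ShadowUntouched v.mem s_110cd9.mem := by v_untouched
    have hsp : Codebook.sparse v.mem c ≠ 0 := by
      intro h0
      rw [h0] at hbr_110cba
      exact hbr_110cba rfl
    have hse := hcok.se_pos_of_sparse hsp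
    have hge := hcok.sorted_values_ge hinv.ok hse
    have hv1 : -1 ≤ argInt (v.reg .r12) := by
      rcases hvar with h1 | h2
      · omega
      · omega
    have hs := hcok.site_sortedValue hL hsp hvar rfl
    have hsv := hs.inside hinv.fb.env.covers
    rw [sv_addr _ _ hv1 (by omega)]
    exact check_site hat.shadow hun hs (toNat_addr _ (by omega))
  · -- dense book: `temp = var`
    refine ReachVia.done ?_
    have hsame : Mem.SameExcept [⟨(e.reg .rsp).toNat - 3856, (e.reg .rsp).toNat - 3000⟩] v.mem s_110cba.mem := by
      u_same
    refine ⟨hat.toKLoop.stackOnly he_room he_top hin w_rsp w_eq ?_ (w_kept.get .rbp rfl) (w_kept.get .r14 rfl) hsame,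
      w_rip, by rw [cdim_keep_stack he_room he_top hsame]; exact hat.k_lt⟩
    show (Vorbis.conv u₀).inv _
    v_inv
  · -- sparse book: `temp = c->sorted_values[var]`
    refine ReachVia.done ?_
    have hsame : Mem.SameExcept [⟨(e.reg .rsp).toNat - 3856, (e.reg .rsp).toNat - 3000⟩] v.mem s_110cde.mem := by
      u_same
    refine ⟨hat.toKLoop.stackOnly he_room he_top hin w_rsp w_eq ?_ (w_kept.get .rbp rfl) (w_kept.get .r14 rfl) hsame,
      w_rip, by rw [cdim_keep_stack he_room he_top hsame]; exact hat.k_lt⟩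
    show (Vorbis.conv u₀).inv _
    v_inv


/-! ### Sub-segment E -/



/-- `cdqe ; lea rbx, [rsi + rax*2]` with `eax = offset < 2^31`: the address of `finalY[offset]`. -/
theorem y_addr (y off : Nat) (ho : off < 2 ^ 31) (hy : y + 2 * off < 2 ^ 64) :
    (UInt64.ofNat y + Word.ofBV (BitVec.signExtend 64 (BitVec.ofNat 32 off)) * 2).toNat = y + 2 * off := by
  have e1 : (BitVec.ofNat 32 off).toNat = off := toNat_ofNat32 off (by omega)
  have e2 := toNat_sext32 (BitVec.ofNat 32 off) (by omega)
  have e3 : (2 : Word).toNat = 2 := rfl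
  rw [UInt64.toNat_add, UInt64.toNat_mul, e2, e1, e3, UInt64.toNat_ofNat']
  omega

/-- `lea r13d, [rax + 1]` with `eax = offset`: `offset + 1`. -/
theorem off_succ (off : Nat) (ho : off + 1 < 2 ^ 32) :
    (BitVec.setWidth 32 (Word.ofBV (BitVec.ofNat 32 off) + 1).toBitVec).toNat = off + 1 := by
  have e1 : (1 : Word).toNat = 1 := rfl
  rw [BitVec.toNat_setWidth, UInt64.toNat_toBitVec, UInt64.toNat_add, toNat_ofBV32, e1, toNat_ofNat32 off (by omega)]
  omega

/-- `add r14d, 1` with `r14 = k`: `k + 1`. -/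
theorem k_succ (k : Nat) (hk : k + 1 < 2 ^ 32) :
    Word.ofBV (Word.part .w32 (UInt64.ofNat k) + 1#32) = UInt64.ofNat (k + 1) := by
  apply UInt64.toNat_inj.mp
  have e1 : (1#32).toNat = 1 := rfl
  rw [toNat_ofBV32, BitVec.toNat_add, part32_toNat, e1, UInt64.toNat_ofNat', UInt64.toNat_ofNat']
  omega


/-- **Sub-segment E, PROVED (under `ArgsIn`)**: 0x110ce2–0x110d06, `finalY[offset++] = temp` (the check: `offset < values`
by FL8 — `Floor1OK.offset_lt` —, `2·values ≤` the block's size by FY1), `++k`; the loop head again by `KLoop.step`. -/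
theorem segE {Lay : Layout} (hLay : Lay.hi = 0x1000000) {μ : Microarch} (hμ : UserX.MicroOK μ) {u₀ : State}
    (hcode : HasCodeNat Lay u₀ Vorbis.L.vorbis_decode_packet_rest.entry Vorbis.Code.code_vorbis_decode_packet_rest.nat Vorbis.L.vorbis_decode_packet_rest.size)
    (hs2 : Asan.SmallCheck Lay μ Vorbis.WayInv (Vorbis.CodeOK u₀) [.rax, .rcx, .rdx] 2 Vorbis.L.__asan_store2_noabort.entry) :
    SegE Lay μ u₀ := by
  intro others frames len Ar stored room mode ysz e ret i j k v hat hin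
  have he := hat.entry
  v_entry he
  have w_rip := hat.rip
  have w_rsp : v.reg .rsp = e.reg .rsp - 3000 := hat.rsp
  have hrsp_v : v.reg .rsp = e.reg .rsp - 3000 := hat.rsp
  have w_eq : Mem.EqOn Vorbis.L.textLo Vorbis.L.textHi u₀.mem v.mem := hat.code
  have hdf : v.flags .df = false := (show abiInv _ from hat.abi).1
  have hmx : v.mxcsr &&& 0x1F80 = 0x1F80 := (show abiInv _ from hat.abi).2
  have hsse := Vorbis.sseOK_of_abiInv hat.abi
  have hr14 : v.reg .r14 = UInt64.ofNat k := hat.r14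
  obtain ⟨hsh, hinv0, hargs⟩ := hat.pre
  have hinv := hat.inv
  have hok := hinv.ok
  have hL := hinv.live
  have hi := hat.i_lt
  -- the floor, the offset, the finalY block
  obtain ⟨g, hg⟩ : ∃ g : Nat, slot64 e v 0x18 = g := ⟨_, rfl⟩
  have hgf : IsFloor v.mem (fOf e) g := by
    rw [← hg]
    exact hat.g
  have hfl := hinv.config.floor.floor hgf
  obtain ⟨off, hoff⟩ : ∃ off : Nat, 2 + Floor1.dimSum v.mem g j + k = off := ⟨_, rfl⟩
  have a8 : e.reg .rsp - 3000 + 0x8 = e.reg .rsp - 2992 := seg4_sp_8 _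
  have a20 : e.reg .rsp - 3000 + 0x20 = e.reg .rsp - 2968 := seg4_sp_20 _
  have hoffs : v.mem.readLE (e.reg .rsp - 2992) 4 = off := by
    rw [← a8, ← hoff, ← hg]
    exact hat.slot_offset
  obtain ⟨y, hy⟩ : ∃ y : Nat, stb_vorbis.finalY v.mem (fOf e) i = y := ⟨_, rfl⟩
  have hys : v.mem.readLE (e.reg .rsp - 2968) 8 = y := by
    rw [← a20, ← hy]
    exact hat.slot_finalY
  -- `offset < values`, and the block holds `2·values` bytes (FL8, FY1)
  have hklt : k < Floor1.class_dimensions v.mem g (Floor1.partition_class_list v.mem g j) := by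
    have h1 := hat.k_lt
    rw [hat.slot_cdim, hat.slot_pclass, hg] at h1
    exact h1
  have hjlt : j < Floor1.partitions v.mem g := by
    rw [← hg]
    exact hat.j_lt
  have hofflt := hfl.offset_lt hjlt hklt
  rw [hoff] at hofflt
  have hvb := hfl.values_bounds
  obtain ⟨hyb, hysz⟩ := hinv.fy i hi
  rw [hy] at hyb
  have hysz' : 2 * Floor1.values v.mem g ≤ (ysz i : Int) := by
    obtain ⟨idx, hidx, rfl⟩ := hgf
    exact hysz idx hidx
  have hyins := hok.inside _ hyb
  have hyoff := hinv.offStack _ hyb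
  simp only [vblock] at hyins
  simp only [] at hyoff
  have hywhere := (LiveBytes.of_block (a := y) (n := ysz i) (hL _ hyb) (Nat.le_refl _) (Nat.le_refl _)).where_
    hat.shadow hsh.offText (by omega) (by u_omega)
  have hya := y_addr y off (by omega) (by omega)
  have hfoff := hinv.objOff
  simp only [voff] at hfoff
  have hyobj := hinv.sep.bufobj _ (SampleBuf.finalY i hi (ysz i) (hy ▸ hyb))
  rw [hy] at hyobj
  simp only [vblock, voff] at hyobj
  u_walk hcode [hμ.vendor] until [Vorbis.L.vorbis_decode_packet_rest.cut7] span [Vorbis.L.textLo, Vorbis.L.textHi] side (v_side)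
  · -- 0x110cf8: store2 finalY + 2·offset
    have hun : ShadowUntouched v.mem s_110cf8.mem := by v_untouched
    have hs : Site (LiveSet others (framesIn frames e)) (y + 2 * off) 2 :=
      Site.of_blk hL hyb (by simp only []; omega) (by simp only []; omega) (by omega)
    exact check_site hat.shadow hun hs hya
  · -- the back edge: the loop head with `k + 1`
    refine ReachVia.done ?_
    have hsame : Mem.SameExcept [⟨(e.reg .rsp).toNat - 3856, (e.reg .rsp).toNat - 3000 + 12⟩,
        ⟨fOf e + 48, fOf e + 56⟩, ⟨fOf e + 84, fOf e + 96⟩, ⟨fOf e + 136, fOf e + 144⟩, ⟨fOf e + 1484, fOf e + 1749⟩,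
        ⟨fOf e + 1752, fOf e + 1784⟩, ⟨y, y + ysz i⟩] v.mem s_110d06.mem := by
      u_same
    have hsame2 : Mem.SameExcept [⟨(e.reg .rsp).toNat - 3856, (e.reg .rsp).toNat - 3000 + 12⟩, ⟨y, y + ysz i⟩]
        v.mem s_110d06.mem := by
      u_same
    have hb : Bits (RunBlk Ar len) len s_110d06.mem (fOf e) := by
      apply hinv.fb.vorbis.bits.frame_fields
      apply Bits.SameFields.of_sameExcept hsame2
      all_goals
        intro w hw
        simp only [List.mem_cons, List.mem_nil_iff, or_false] at hw
        rcases hw with rfl | rfl <;> simp only [] <;> omega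
    have hoff' : slot32 e s_110d06 0x8 = 2 + Floor1.dimSum v.mem (slot64 e v 0x18) j + (k + 1) := by
      rw [hg, ← Nat.add_assoc, hoff]
      show s_110d06.mem.readLE (e.reg .rsp - 3000 + 0x8) 4 = off + 1
      rw [a8, w_mem, Mem.readLE_writeLE_same _ _ _ _ (by omega), off_succ off (by omega)]
      omega
    refine ⟨?_, w_rip⟩
    apply hat.toKLoop.step he_room he_top hin w_rsp w_eq ?_ ?_ ?_ ?_ (hy ▸ hsame) hoff' hb
    · show (Vorbis.conv u₀).inv _
      v_inv
    · rw [w_kept.get .rbp rfl]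
      exact hat.rbp
    · rw [w_r14]
      exact k_succ k (by have := hat.toKLoop.cdim_le; have := hat.k_lt; omega)
    · exact hat.k_lt


/-! ### Sub-segment B -/



/-- `movsx rbx, bx ; imul rbx, rbx, 0x848 ; add rbx, [rbp + 0xa8]` with `bx = book`, bit 15 clear: `f->codebooks + book`. -/
theorem book_addr (b cb : Nat) (hb : b < 32768) (hcb : cb + 2120 * b < 2 ^ 64) :
    (Word.ofBV (BitVec.signExtend 64 (Word.part .w16 (UInt64.ofNat b))) * 2120 + UInt64.ofNat cb).toNat = cb + 2120 * b := by
  have e1 : (Word.part .w16 (UInt64.ofNat b)).toNat = b := by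
    unfold Word.part
    simp only [Width.bits, BitVec.toNat_setWidth, UInt64.toNat_toBitVec, UInt64.toNat_ofNat']
    omega
  have e2 : (Word.part .w16 (UInt64.ofNat b)).toInt = (b : Int) := by
    rw [BitVec.toInt_eq_toNat_cond, e1]
    have : 2 * b < 2 ^ 16 := by omega
    simp only [this, if_true]
  have e3 : (2120 : Word).toNat = 2120 := rfl
  rw [ofBV_signExtend64, e2, word_nonneg _ (Int.natCast_nonneg _), Int.toNat_natCast]
  unfold addr
  rw [UInt64.toNat_add, UInt64.toNat_mul, e3, UInt64.toNat_ofNat', UInt64.toNat_ofNat']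
  omega


/-- **Sub-segment B, PROVED (under `ArgsIn`)**: 0x110d5c–0x110d8d + 0x110c92–0x110c9a, `c = f->codebooks + book`, the optional call
of prep_huffman (its precondition from `DecodeInv.readerEnv`, `Reader.bits_of_window` and the frame's shadow layer; its footprint
through `KLoop.step'`). -/
theorem segB {Lay : Layout} (hLay : Lay.hi = 0x1000000) {μ : Microarch} (hμ : UserX.MicroOK μ) {u₀ : State}
    (hcode : HasCodeNat Lay u₀ Vorbis.L.vorbis_decode_packet_rest.entry Vorbis.Code.code_vorbis_decode_packet_rest.nat Vorbis.L.vorbis_decode_packet_rest.size)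
    (h_prep : ∀ (others : List Obj) (frames : List (Nat × FrameLayout)) (Blk : Block → Prop) (len : Nat), Calls Lay μ Vorbis.WayInv (Vorbis.conv u₀) Vorbis.L.prep_huffman.entry (Vorbis.Spec.prep_huffman.spec others frames Blk len))
    (hl8 : Asan.SmallCheck Lay μ Vorbis.WayInv (Vorbis.CodeOK u₀) [.rax, .rcx, .rdx] 8 Vorbis.L.__asan_load8_noabort.entry)
    (hl4 : Asan.SmallCheck Lay μ Vorbis.WayInv (Vorbis.CodeOK u₀) [.rax, .rcx, .rdx] 4 Vorbis.L.__asan_load4_noabort.entry) :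
    SegB Lay μ u₀ := by
  intro others frames len Ar stored room mode ysz e ret i j k b v hat hin
  have he := hat.entry
  v_entry he
  have w_rip := hat.rip
  have w_rsp : v.reg .rsp = e.reg .rsp - 3000 := hat.rsp
  have hrsp_v : v.reg .rsp = e.reg .rsp - 3000 := hat.rsp
  have w_eq : Mem.EqOn Vorbis.L.textLo Vorbis.L.textHi u₀.mem v.mem := hat.code
  have hdf : v.flags .df = false := (show abiInv _ from hat.abi).1
  have hmx : v.mxcsr &&& 0x1F80 = 0x1F80 := (show abiInv _ from hat.abi).2
  have hsse := Vorbis.sseOK_of_abiInv hat.abi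
  have hprep := h_prep others (framesIn frames e) (RunBlk Ar len) len
  obtain ⟨hsh, hinv0, hargs⟩ := hat.pre
  have hinv := hat.inv
  have hok := hinv.ok
  have hL := hinv.live
  have hbits := hinv.fb.vorbis.bits
  obtain ⟨f, hf⟩ : ∃ f : Nat, fOf e = f := ⟨_, rfl⟩
  rw [hf] at hinv hbits
  have hrbp : v.reg .rbp = addr f := eq_addr _ _ (by rw [hat.rbp, hf])
  have hrbx : v.reg .rbx = UInt64.ofNat b := hat.rbx
  have hfoff := hinv.objOff
  have hfr := hbits.OBR
  simp only [voff] at hfoff hfr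
  have hfw : f + 1808 ≤ 0xC00000 ∧ (f + 1808 ≤ 0x700000 ∨ 0x800000 ≤ f) := ⟨hfr.2, hfoff⟩
  clear hfoff
  have ra8 : v.mem.readLE (addr f + 0xa8) 8 = stb_vorbis.codebooks v.mem f := by simp only [vfield, vacc, voff]
  have hfn : (addr f).toNat = f := toNat_addr f (by omega)
  have hblt : (b : Int) < stb_vorbis.codebook_count v.mem f := by
    rw [← hf]
    exact hat.book_lt
  have hcbin := hinv.config.cb0.cb_in b hblt
  have hcbok := hok.inside _ (hinv.config.reads_blk ConfigOK.Reads.codebooks)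
  have ecb0 : stb_vorbis.codebooks v.mem f = v.mem.u64 (f + 168) := by simp only [vacc, voff]
  simp only [vblock, vacc, voff] at hcbin hcbok
  rw [← ecb0] at hcbin hcbok
  u_walk hcode [hμ.vendor] until [cutDec] span [Vorbis.L.textLo, Vorbis.L.textHi] side (v_side)
  · -- 0x110d63: load8 f + 0xa8 (`f->codebooks`)
    have hun : ShadowUntouched v.mem s_110d63.mem := by v_untouched
    exact check_site hat.shadow hun (hbits.site_field hL 168 8 (by omega) (by omega) rfl) (by u_omega)
  · -- 0x110d81: load4 f + 0x6e8 (`f->valid_bits`)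
    have hun : ShadowUntouched v.mem s_110d81.mem := by v_untouched
    exact check_site hat.shadow hun (hbits.site_field hL 1768 4 (by omega) (by omega) rfl) (by u_omega)
  · v_inv
  · -- prep_huffman's precondition
    have hun : ShadowUntouched v.mem s_110c95.mem := by v_untouched
    have hsame : Mem.SameExcept [⟨(e.reg .rsp).toNat - 3856, (e.reg .rsp).toNat - 3000⟩] v.mem s_110c95.mem := by
      u_same
    have e1 : (s_110c95.reg .rsp).toNat + 8 = (spOf e).toNat := by
      rw [w_rsp]
      u_omega
    have erdi : (s_110c95.reg .rdi).toNat = f := by rw [w_rdi, hfn]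
    refine ⟨⟨?_, hsh.offText⟩, ?_, ?_⟩
    · rw [e1]
      exact hat.shadow.untouched hun
    · rw [erdi]
      exact hinv.readerEnv
    · rw [erdi]
      exact Reader.bits_of_window hbits hsame (by omega)
  · -- after prep_huffman
    have c_rdi : (s_110c95.reg .rdi).toNat = f := by rw [w_rdi_110c95, hfn]
    have hpost : PrepHuffmanPost (RunBlk Ar len) len f s_110c95 s_110c95r := by
      rw [← c_rdi]
      exact w_post
    v_after_call w_rsp_110c95 w_mem_110c95
    simp only [c_rdi] at w_same
    -- the slot the round still needs, through the callee's footprint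
    have hso : s_110c95r.mem.readLE (e.reg .rsp - 3000 + 0x8) 4 = slot32 e v 0x8 := by
      have h0 : v.mem.readLE (e.reg .rsp - 3000 + 0x8) 4 = slot32 e v 0x8 := rfl
      u_frame h0
    have hsame : Mem.SameExcept [⟨(e.reg .rsp).toNat - 3856, (e.reg .rsp).toNat - 3000 + 12⟩,
        ⟨f + 48, f + 56⟩, ⟨f + 84, f + 96⟩, ⟨f + 136, f + 144⟩, ⟨f + 1484, f + 1749⟩,
        ⟨f + 1752, f + 1784⟩,
        ⟨stb_vorbis.finalY v.mem f i, stb_vorbis.finalY v.mem f i + ysz i⟩] v.mem s_110c95r.mem := by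
      u_same
    have hb : Bits (RunBlk Ar len) len s_110c95r.mem f := hpost.reader.bits
    u_walk hcode [hμ.vendor] until [cutDec] span [Vorbis.L.textLo, Vorbis.L.textHi] side (v_side)
    refine ReachVia.done ?_
    have hst := hat.toKLoop.step' (k' := k) he_room he_top hin w_rsp w_eq (by show (Vorbis.conv u₀).inv _; v_inv)
      (by rw [w_kept .rbp rfl]; exact hat.rbp)
      (by rw [w_kept .r14 rfl]; exact hat.r14) hat.k_le
      (by rw [hf, w_mem]; exact hsame)
      (by
        show s_110c9a.mem.readLE (e.reg .rsp - 3000 + 0x8) 4 = _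
        rw [w_mem, hso]
        exact hat.slot_offset)
      (by rw [hf, w_mem]; exact hb)
    obtain ⟨hbody, ecb, ecc, ecd⟩ := hst
    refine ⟨hbody, w_rip, by rw [ecd]; exact hat.k_lt, ?_, by rw [ecc]; exact hat.book_lt⟩
    unfold stb_vorbis.codebooks_at
    rw [ecb, w_rbx, hf]
    simp only [voff]
    exact book_addr b _ hat.b_lt (by omega)
  · -- `valid_bits > 9`: no call
    refine ReachVia.done ?_
    have hsame : Mem.SameExcept [⟨(e.reg .rsp).toNat - 3856, (e.reg .rsp).toNat - 3000⟩] v.mem s_110d8d.mem := by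
      u_same
    obtain ⟨hbody, ecb, ecc, ecd⟩ := hat.toKLoop.stackOnly' he_room he_top hin w_rsp w_eq
      (by show (Vorbis.conv u₀).inv _; v_inv) (w_kept.get .rbp rfl) (w_kept.get .r14 rfl) hsame
    refine ⟨hbody, w_rip, by rw [ecd]; exact hat.k_lt, ?_, by rw [ecc]; exact hat.book_lt⟩
    unfold stb_vorbis.codebooks_at
    rw [ecb, w_rbx, hf]
    simp only [voff]
    exact book_addr b _ hat.b_lt (by omega)


/-! ### Sub-segment A: the exit arm -/



/-- **THE EXIT ASSERTION OF THE SEGMENT, from the loop invariant with `k = cdim`**: the only store since the loop head is the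
increment of the slot `[rsp + 0x48] = j`; `r15 = g`. `offset = 2 + Σ_{j' < j} + cdim = 2 + Σ_{j' ≤ j}` (`Floor1.dimSum_succ`). -/
theorem at3_of_exit {u₀ : State} {others : List Obj} {frames : List (Nat × FrameLayout)} {len : Nat} {Ar : Arena}
    {stored room : Int} {mode : Nat} {ysz : Nat → Nat} {e : State} {ret : Word} {i j k : Nat} {v s : State}
    (h : KLoop u₀ others frames len Ar stored room mode ysz e ret i j k v)
    (he_room : 0x700000 + 3856 ≤ (e.reg .rsp).toNat) (he_top : (e.reg .rsp).toNat + 8 ≤ 0x800000)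
    (hargs_in : ArgsIn e) (hk : k = slot32 e v 0x10)
    (hrip : s.rip = Vorbis.L.vorbis_decode_packet_rest.cut8)
    (hrsp : s.reg .rsp = spOf e) (hcode : Vorbis.CodeOK u₀ s.mem) (habi : abiInv s)
    (hrbp : (s.reg .rbp).toNat = fOf e) (hr15 : (s.reg .r15).toNat = slot64 e v 0x18)
    (hs : Mem.SameExcept [⟨(e.reg .rsp).toNat - 3000 + 0x48, (e.reg .rsp).toNat - 3000 + 0x4c⟩] v.mem s.mem)
    (hj : slot32 e s 0x48 = j + 1) :
    At3 u₀ others frames len Ar stored room mode ysz e ret i (j + 1) s := by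
  unfold ArgsIn at hargs_in
  obtain ⟨hsh, hinv0, hargs⟩ := h.pre
  have hinv := h.inv
  have hi := h.i_lt
  have hok := hinv.ok
  have hfoff := hinv.objOff
  simp only [voff] at hfoff
  have hb : Bits (RunBlk Ar len) len s.mem (fOf e) :=
    Reader.bits_of_window hinv.fb.vorbis.bits hs (by omega)
  -- the invariant: the store is a stack store
  have hs7 : Mem.SameExcept [⟨(e.reg .rsp).toNat - 3000 + 0x48, (e.reg .rsp).toNat - 3000 + 0x4c⟩,
      ⟨fOf e + 48, fOf e + 56⟩, ⟨fOf e + 84, fOf e + 96⟩, ⟨fOf e + 136, fOf e + 144⟩, ⟨fOf e + 1484, fOf e + 1749⟩,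
      ⟨fOf e + 1752, fOf e + 1784⟩,
      ⟨stb_vorbis.finalY v.mem (fOf e) i, stb_vorbis.finalY v.mem (fOf e) i + ysz i⟩] v.mem s.mem := by
    apply hs.mono
    intro w hw a h1 h2
    have e1 : w = ⟨(e.reg .rsp).toNat - 3000 + 0x48, (e.reg .rsp).toNat - 3000 + 0x4c⟩ := List.mem_singleton.mp hw
    subst e1
    exact ⟨_, List.mem_cons_self, h1, h2⟩
  have hinv' := seg4_inv_step hinv hi (by omega) (by omega) hs7 hb
  -- the configuration at the loop head reads as at the function's entry
  have hd0 : DecodeSame (fOf e) e.mem v.mem :=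
    StoreOK.decodeSame hinv0.ok hinv0.ob1 hinv0.sep h.same (fun w hw => footprint_storeOK h.pre he_room w hw)
  have he0 : ObjEq ConfigOK.wins e.mem (fOf e) v.mem (fOf e) := hd0.sub ConfigOK.wins_decode
  have hmode : (mode : Int) < stb_vorbis.mode_count v.mem (fOf e) := by
    have e1 : stb_vorbis.mode_count v.mem (fOf e) = stb_vorbis.mode_count e.mem (fOf e) := by
      simp only [vacc, voff]
      exact he0.i32 480 (by decide)
    rw [e1]
    exact hargs.mode_lt
  have hw : ∀ w, w ∈ [(⟨(e.reg .rsp).toNat - 3000 + 0x48, (e.reg .rsp).toNat - 3000 + 0x4c⟩ : Span)] →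
      StoreOK (RunBlk Ar len) v.mem (fOf e) w := by
    intro w hsp
    have e1 : w = ⟨(e.reg .rsp).toNat - 3000 + 0x48, (e.reg .rsp).toNat - 3000 + 0x4c⟩ := List.mem_singleton.mp hsp
    subst e1
    apply StoreOK.off
    intro B hB
    have := hinv.offStack B hB
    simp only []
    omega
  have hcf := cfgEq_of_stores (mode := mode) hinv hi h.g hmode hs hw
  -- every other read of the stack region is kept
  have keep : ∀ (a : Word) (n : Nat), a.toNat + n < 2 ^ 64 →
      (a.toNat + n ≤ (e.reg .rsp).toNat - 3000 + 0x48 ∨ (e.reg .rsp).toNat - 3000 + 0x4c ≤ a.toNat) →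
      s.mem.readLE a n = v.mem.readLE a n := by
    intro a n h1 h2
    apply hs.readLE a n h1
    intro w hw'
    have e1 : w = ⟨(e.reg .rsp).toNat - 3000 + 0x48, (e.reg .rsp).toNat - 3000 + 0x4c⟩ := List.mem_singleton.mp hw'
    subst e1
    simp only []
    omega
  have hm : mOf e = stb_vorbis.mode_config_at (fOf e) mode := hargs.m_eq
  have hfk := hcf.floor
  have hfl := hinv.config.floor.floor h.g
  have hj256 : j < 256 := by
    have h1 := Floor1.partitions_lt v.mem (slot64 e v 0x18)
    have h2 := h.j_lt
    omega
  refine ⟨⟨?frame, ?slot_f, ?slot_len, ?slot_m, ?slot_ls, ?slot_rs, ?slot_n, ?slot_n2, ?slot_sb, ?arg_re, ?arg_left,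
    ?left_val⟩, hrip, ?g, hrbp, hj, ?j_le, ?slot_offset, ?slot_i, ?i_lt, ?slot_finalY, ?slot_map⟩
  case frame =>
    refine ⟨h.entry, h.pre, hrsp, hcode, habi, ?_, ?_, ?_, ?_, ?_, ?_, ?_, ?_, ?_, hinv'⟩
    · apply h.same.step_same hs
      intro w hw' a h1 h2
      apply covered_footprint
      have e1 : w = ⟨(e.reg .rsp).toNat - 3000 + 0x48, (e.reg .rsp).toNat - 3000 + 0x4c⟩ := List.mem_singleton.mp hw'
      subst e1
      left
      simp only [] at h1 h2
      omega
    · rw [keep _ 8 (by u_omega) (by u_omega)]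
      exact h.ra
    · rw [keep _ 8 (by u_omega) (by u_omega)]
      exact h.s_r15
    · rw [keep _ 8 (by u_omega) (by u_omega)]
      exact h.s_r14
    · rw [keep _ 8 (by u_omega) (by u_omega)]
      exact h.s_r13
    · rw [keep _ 8 (by u_omega) (by u_omega)]
      exact h.s_r12
    · rw [keep _ 8 (by u_omega) (by u_omega)]
      exact h.s_rbp
    · rw [keep _ 8 (by u_omega) (by u_omega)]
      exact h.s_rbx
    · apply h.shadow.untouched
      apply hs.eqOn
      intro w hw'
      have e1 : w = ⟨(e.reg .rsp).toNat - 3000 + 0x48, (e.reg .rsp).toNat - 3000 + 0x4c⟩ := List.mem_singleton.mp hw'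
      subst e1
      simp only []
      omega
  case slot_f =>
    have e1 : slot64 e s 0x40 = slot64 e v 0x40 := keep _ 8 (by u_omega) (by u_omega)
    rw [e1]
    exact h.slot_f
  case slot_len =>
    have e1 : slot64 e s 0x68 = slot64 e v 0x68 := keep _ 8 (by u_omega) (by u_omega)
    rw [e1]
    exact h.slot_len
  case slot_m =>
    have e1 : slot64 e s 0x70 = slot64 e v 0x70 := keep _ 8 (by u_omega) (by u_omega)
    rw [e1]
    exact h.slot_m
  case slot_ls =>
    have e1 : slot32 e s 0x78 = slot32 e v 0x78 := keep _ 4 (by u_omega) (by u_omega)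
    rw [e1]
    exact h.slot_ls
  case slot_rs =>
    have e1 : slot32 e s 0x7c = slot32 e v 0x7c := keep _ 4 (by u_omega) (by u_omega)
    rw [e1]
    exact h.slot_rs
  case slot_n =>
    have e1 : slot32 e s 0x50 = slot32 e v 0x50 := keep _ 4 (by u_omega) (by u_omega)
    rw [e1, hm, hcf.nOf, ← hm]
    exact h.slot_n
  case slot_n2 =>
    have e1 : slot32 e s 0x3c = slot32 e v 0x3c := keep _ 4 (by u_omega) (by u_omega)
    rw [e1, hm, hcf.nOf, ← hm]
    exact h.slot_n2
  case slot_sb =>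
    have e1 : slot64 e s 0x60 = slot64 e v 0x60 := keep _ 8 (by u_omega) (by u_omega)
    rw [e1]
    exact h.slot_sb
  case arg_re =>
    rw [keep _ 4 (by u_omega) (by u_omega)]
    exact h.arg_re
  case arg_left =>
    rw [keep _ 8 (by u_omega) (by u_omega)]
    exact h.arg_left
  case left_val =>
    have hlw := hargs.left_obj.1.where_ hsh.inv hsh.offText (by decide)
    have hl1 := hargs.left_obj.2
    have ea : (addr (pLeftOf e)).toNat = pLeftOf e := toNat_addr _ (by omega)
    have e1 : s.mem.i32 (pLeftOf e) = v.mem.i32 (pLeftOf e) := by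
      unfold Mem.i32 Mem.u32
      rw [keep (addr (pLeftOf e)) 4 (by omega) (by omega)]
    rw [e1]
    exact h.left_val
  case g =>
    rw [hr15]
    exact hcf.isFloor
  case j_le =>
    rw [hr15, Floor1.same_partitions hfk.same hfk.inside]
    have := h.j_lt
    omega
  case slot_offset =>
    have e1 : slot32 e s 0x8 = slot32 e v 0x8 := keep _ 4 (by u_omega) (by u_omega)
    rw [e1, hr15, Floor1.same_dimSum hfk.same hfk.inside (j + 1) (by omega), Floor1.dimSum_succ, h.slot_offset, hk,
      h.slot_cdim, h.slot_pclass]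
    omega
  case slot_i =>
    have e1 : slot32 e s 0x54 = slot32 e v 0x54 := keep _ 4 (by u_omega) (by u_omega)
    rw [e1]
    exact h.slot_i
  case i_lt =>
    rw [hcf.channels]
    exact hi
  case slot_finalY =>
    have e1 : slot64 e s 0x20 = slot64 e v 0x20 := keep _ 8 (by u_omega) (by u_omega)
    rw [e1, hcf.finalY]
    exact h.slot_finalY
  case slot_map =>
    have e1 : slot64 e s 0x58 = slot64 e v 0x58 := keep _ 8 (by u_omega) (by u_omega)
    rw [e1, hm, hcf.mapOf, ← hm]
    exact h.slot_map


/-- The low half of a small number in a register is the number. -/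
theorem seg4_part32_ofNat (k : Nat) (hk : k < 2 ^ 32) : Word.part .w32 (UInt64.ofNat k) = BitVec.ofNat 32 k := by
  apply BitVec.eq_of_toNat_eq
  rw [part32_toNat, UInt64.toNat_ofNat', BitVec.toNat_ofNat]
  have e1 : k % 2 ^ 64 = k := Nat.mod_eq_of_lt (by omega)
  rw [e1]

/-- **The exit arm of sub-segment A, PROVED (under `ArgsIn`)**: 0x110d0a–0x110d11 + 0x110e74–0x110e79 with `k = cdim`: `r15 = g`,
`++j` → the entry assertion `At3 … (j + 1)` of segment .3 (`at3_of_exit`). The other arm is refuted by `k = cdim`. -/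
theorem segA_exit {Lay : Layout} (hLay : Lay.hi = 0x1000000) {μ : Microarch} (hμ : UserX.MicroOK μ) {u₀ : State}
    (hcode : HasCodeNat Lay u₀ Vorbis.L.vorbis_decode_packet_rest.entry Vorbis.Code.code_vorbis_decode_packet_rest.nat Vorbis.L.vorbis_decode_packet_rest.size)
    (others : List Obj) (frames : List (Nat × FrameLayout)) (len : Nat) (Ar : Arena) (stored room : Int)
    (mode : Nat) (ysz : Nat → Nat) (e : State) (ret : Word) (i j k : Nat) (v : State)
    (hat : AtK u₀ others frames len Ar stored room mode ysz e ret i j k v) (hin : ArgsIn e)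
    (hk : k = slot32 e v 0x10) :
    ReachVia Lay μ Vorbis.WayInv v (fun w => At3 u₀ others frames len Ar stored room mode ysz e ret i (j + 1) w) := by
  have he := hat.entry
  v_entry he
  have w_rip := hat.rip
  have w_rsp : v.reg .rsp = e.reg .rsp - 3000 := hat.rsp
  have hrsp_v : v.reg .rsp = e.reg .rsp - 3000 := hat.rsp
  have w_eq : Mem.EqOn Vorbis.L.textLo Vorbis.L.textHi u₀.mem v.mem := hat.code
  have hdf : v.flags .df = false := (show abiInv _ from hat.abi).1
  have hmx : v.mxcsr &&& 0x1F80 = 0x1F80 := (show abiInv _ from hat.abi).2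
  have hsse := Vorbis.sseOK_of_abiInv hat.abi
  have hr14 : v.reg .r14 = UInt64.ofNat k := hat.r14
  have hcd8 := hat.toKLoop.cdim_le
  have a10 : e.reg .rsp - 3000 + 0x10 = e.reg .rsp - 2984 := seg4_sp_10 _
  have a18 : e.reg .rsp - 3000 + 0x18 = e.reg .rsp - 2976 := seg4_sp_18 _
  have a48 : e.reg .rsp - 3000 + 0x48 = e.reg .rsp - 2928 := seg4_sp_48 _
  have hcdim : v.mem.readLE (e.reg .rsp - 2984) 4 = k := by
    rw [← a10, hk]
  obtain ⟨g, hg⟩ : ∃ g : Nat, slot64 e v 0x18 = g := ⟨_, rfl⟩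
  have hgs : v.mem.readLE (e.reg .rsp - 2976) 8 = g := by
    rw [← a18]
    exact hg
  have hjs : v.mem.readLE (e.reg .rsp - 2928) 4 = j := by
    rw [← a48]
    exact hat.slot_j
  u_walk hcode [hμ.vendor] until [Vorbis.L.vorbis_decode_packet_rest.cut8] span [Vorbis.L.textLo, Vorbis.L.textHi] side (v_side)
  · -- `k ≥ cdim`: `++j`, the head of the partition loop
    refine ReachVia.done ?_
    have hsame : Mem.SameExcept [⟨(e.reg .rsp).toNat - 3000 + 0x48, (e.reg .rsp).toNat - 3000 + 0x4c⟩] v.mem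
        s_110e79.mem := by
      u_same
    have hj256 : j < 256 := by
      have h1 := Floor1.partitions_lt v.mem (slot64 e v 0x18)
      have h2 := hat.j_lt
      omega
    apply at3_of_exit hat.toKLoop he_room he_top hin hk w_rip ((w_kept .rsp rfl).trans hat.rsp) w_eq ?_ ?_ ?_ hsame ?_
    · show (Vorbis.conv u₀).inv _
      v_inv
    · rw [w_kept .rbp rfl]
      exact hat.rbp
    · rw [w_r15, hg, UInt64.toNat_ofNat']
      apply Nat.mod_eq_of_lt
      rw [← hg]
      exact Mem.readLE_lt' _ _ 8
    · show s_110e79.mem.readLE (e.reg .rsp - 3000 + 0x48) 4 = j + 1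
      rw [a48, w_mem, Mem.readLE_writeLE_same _ _ _ _ (by omega)]
      have e1 : (1#32).toNat = 1 := rfl
      rw [BitVec.toNat_add, BitVec.toNat_ofNat, e1]
      omega
  · -- `k < cdim` contradicts `k = cdim`
    exfalso
    apply hbr_110d11
    rw [seg4_part32_ofNat k (by omega)]
    exact Int.le_refl _


/-! ### Sub-segment A: the bit-level facts of its body arms -/


/-- `and eax, esi ; cdqe ; movsxd rdx, [pclass] ; lea rbx, [rax + rdx*8 + 0x28] ; lea rdi, [r13 + rbx*2 + 2]`: the address of
`g->subclass_books[pclass][cval & csub]`, for a masked index and a class number below `2^31`. -/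
theorem sb_addr (g cv cs pc : Nat) (hidx : (cv % 2 ^ 32) &&& (cs % 2 ^ 32) < 8) (hpc : pc < 16)
    (hg : g + 400 < 2 ^ 64) :
    (UInt64.ofNat g + (Word.ofBV (BitVec.signExtend 64 (BitVec.ofNat 32 cv &&& BitVec.ofNat 32 cs)) +
      Word.ofBV (BitVec.signExtend 64 (BitVec.ofNat 32 pc)) * 8 + 40) * 2 + 2).toNat
      = g + 82 + 2 * (8 * pc + ((cv % 2 ^ 32) &&& (cs % 2 ^ 32))) := by
  have e1 : (BitVec.ofNat 32 cv &&& BitVec.ofNat 32 cs).toNat = (cv % 2 ^ 32) &&& (cs % 2 ^ 32) := by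
    rw [BitVec.toNat_and, BitVec.toNat_ofNat, BitVec.toNat_ofNat]
  have e2 := toNat_sext32 (BitVec.ofNat 32 cv &&& BitVec.ofNat 32 cs) (by rw [e1]; omega)
  have e3 : (BitVec.ofNat 32 pc).toNat = pc := toNat_ofNat32 pc (by omega)
  have e4 := toNat_sext32 (BitVec.ofNat 32 pc) (by rw [e3]; omega)
  have c8 : (8 : Word).toNat = 8 := rfl
  have c40 : (40 : Word).toNat = 40 := rfl
  have c2 : (2 : Word).toNat = 2 := rfl
  generalize (cv % 2 ^ 32) &&& (cs % 2 ^ 32) = idx at *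
  rw [UInt64.toNat_add, UInt64.toNat_add, UInt64.toNat_mul, UInt64.toNat_add, UInt64.toNat_add, UInt64.toNat_mul,
    e2, e1, e4, e3, c8, c40, c2, UInt64.toNat_ofNat']
  omega



/-- `test bx, 0x8000` is zero: bit 15 of the loaded `uint16` is clear. -/
theorem bit15_clear (x : BitVec 16) (h : (BitVec.setWidth 16 (BitVec.zeroExtend 32 x) &&& 32768#16).toNat = 0) :
    x.toNat < 32768 := by
  have h0 : (BitVec.setWidth 16 (BitVec.zeroExtend 32 x) &&& 32768#16) = 0#16 := BitVec.eq_of_toNat_eq h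
  have h1 : x < 32768#16 := by
    bv_decide
  exact BitVec.lt_def.mp h1

/-- `movzx ebx, word`: the zero-extended `uint16` in the register. -/
theorem zext16_reg (b : Nat) (hb : b < 65536) : Word.ofBV (BitVec.zeroExtend 32 (BitVec.ofNat 16 b)) = UInt64.ofNat b := by
  apply UInt64.toNat_inj.mp
  rw [toNat_ofBV32, UInt64.toNat_ofNat']
  simp only [BitVec.toNat_setWidth, BitVec.truncate_eq_setWidth, BitVec.toNat_ofNat]
  omega


/-! ### Sub-segment A: the body arms -/

/-- 0x110e31 (`mov eax,[rsp+0x8]`, line 3261): the `book < 0` arm, before `finalY[offset++] = 0`. -/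
abbrev cutZero : Word := 0x110e31

/-- **0x110e31, before `finalY[offset++] = 0`** (line 3261): `KLoop` ∧ `k < cdim`. -/
structure AtZero (u₀ : State) (others : List Obj) (frames : List (Nat × FrameLayout)) (len : Nat) (Ar : Arena)
    (stored room : Int) (mode : Nat) (ysz : Nat → Nat) (u : State) (ret : Word)
    (i j k : Nat) (v : State) : Prop
    extends KLoop u₀ others frames len Ar stored room mode ysz u ret i j k v where
  rip : v.rip = cutZero
  k_lt : k < slot32 u v 0x10

/-- **`KLoop` after stores BELOW THE SLOT `[rsp + 8]` only** (the return addresses of check calls, the spill of `cval` at `[rsp]`):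
nothing the round's assertion reads has changed. -/
theorem KLoop.scratch' {u₀ : State} {others : List Obj} {frames : List (Nat × FrameLayout)} {len : Nat} {Ar : Arena}
    {stored room : Int} {mode : Nat} {ysz : Nat → Nat} {e : State} {ret : Word} {i j k : Nat} {v s : State}
    (h : KLoop u₀ others frames len Ar stored room mode ysz e ret i j k v)
    (he_room : 0x700000 + 3856 ≤ (e.reg .rsp).toNat) (he_top : (e.reg .rsp).toNat + 8 ≤ 0x800000)
    (hargs_in : ArgsIn e)
    (hrsp : s.reg .rsp = spOf e) (hcode : Vorbis.CodeOK u₀ s.mem) (habi : abiInv s)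
    (hrbp : s.reg .rbp = v.reg .rbp) (hr14 : s.reg .r14 = v.reg .r14)
    (hs : Mem.SameExcept [⟨(e.reg .rsp).toNat - 3856, (e.reg .rsp).toNat - 3000 + 8⟩] v.mem s.mem) :
    KLoop u₀ others frames len Ar stored room mode ysz e ret i j k s ∧
      stb_vorbis.codebooks s.mem (fOf e) = stb_vorbis.codebooks v.mem (fOf e) ∧
      stb_vorbis.codebook_count s.mem (fOf e) = stb_vorbis.codebook_count v.mem (fOf e) ∧
      slot32 e s 0x10 = slot32 e v 0x10 := by
  have hfoff := h.inv.objOff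
  simp only [voff] at hfoff
  have hb : Bits (RunBlk Ar len) len s.mem (fOf e) :=
    Reader.bits_of_window h.inv.fb.vorbis.bits hs (by omega)
  apply h.step' he_room he_top hargs_in hrsp hcode habi (by rw [hrbp]; exact h.rbp) (by rw [hr14]; exact h.r14) h.k_le
    _ _ hb
  · apply hs.mono
    intro w hw a h1 h2
    have e1 : w = ⟨(e.reg .rsp).toNat - 3856, (e.reg .rsp).toNat - 3000 + 8⟩ := List.mem_singleton.mp hw
    subst e1
    refine ⟨_, List.mem_cons_self, ?_, ?_⟩
    · exact h1
    · simp only [] at h2 ⊢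
      omega
  · have e1 : slot32 e s 0x8 = slot32 e v 0x8 := by
      apply hs.readLE _ 4 (by u_omega)
      intro w hw
      have e1 : w = ⟨(e.reg .rsp).toNat - 3856, (e.reg .rsp).toNat - 3000 + 8⟩ := List.mem_singleton.mp hw
      subst e1
      simp only []
      u_omega
    rw [e1]
    exact h.slot_offset

/-- `sint16` of a `uint16` with bit 15 clear is the number itself. -/
theorem sint16_small (b : Nat) (hb : b < 32768) : sint16 b = (b : Int) := by
  rcases sint16_cases b with h | h
  · exact h.2
  · omega

/-- **The state at 0x110d56** (after `cval >>= cbits` was spilled to `[rsp]`): `KLoop` again, from the loop head's. -/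
theorem kloop_at_test {u₀ : State} {others : List Obj} {frames : List (Nat × FrameLayout)} {len : Nat} {Ar : Arena}
    {stored room : Int} {mode : Nat} {ysz : Nat → Nat} {e : State} {ret : Word} {i j k : Nat} {v s : State}
    (h : KLoop u₀ others frames len Ar stored room mode ysz e ret i j k v)
    (he_room : 0x700000 + 3856 ≤ (e.reg .rsp).toNat) (he_top : (e.reg .rsp).toNat + 8 ≤ 0x800000)
    (hargs_in : ArgsIn e)
    (hrsp : s.reg .rsp = e.reg .rsp - 3000) (hcode : Vorbis.CodeOK u₀ s.mem) (habi : abiInv s)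
    (hrbp : s.reg .rbp = v.reg .rbp) (hr14 : s.reg .r14 = v.reg .r14) (ra x : Nat)
    (hmem : s.mem = (v.mem.writeLE (e.reg .rsp - 3008) 8 ra).writeLE (e.reg .rsp - 3000) 4 x) :
    KLoop u₀ others frames len Ar stored room mode ysz e ret i j k s ∧
      stb_vorbis.codebooks s.mem (fOf e) = stb_vorbis.codebooks v.mem (fOf e) ∧
      stb_vorbis.codebook_count s.mem (fOf e) = stb_vorbis.codebook_count v.mem (fOf e) ∧
      slot32 e s 0x10 = slot32 e v 0x10 := by
  have hs : Mem.SameExcept [⟨(e.reg .rsp).toNat - 3856, (e.reg .rsp).toNat - 3000 + 8⟩] v.mem s.mem := by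
    rw [hmem]
    u_same
  exact h.scratch' he_room he_top hargs_in hrsp hcode habi hrbp hr14 hs

/-- **The body arms of sub-segment A, PROVED (under `ArgsIn`)**: 0x110d0a–0x110d56 with `k < cdim`: `book = g->subclass_books[pclass][cval & csub]`
(check 0x110d3a: FL5, FL6 `book_idx_lt`), `cval >>= cbits` spilled to `[rsp]`; `book < 0` → `AtZero`, else `AtBook` with FL6 `book_range`. -/
theorem segA_body {Lay : Layout} (hLay : Lay.hi = 0x1000000) {μ : Microarch} (hμ : UserX.MicroOK μ) {u₀ : State}
    (hcode : HasCodeNat Lay u₀ Vorbis.L.vorbis_decode_packet_rest.entry Vorbis.Code.code_vorbis_decode_packet_rest.nat Vorbis.L.vorbis_decode_packet_rest.size)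
    (hl2 : Asan.SmallCheck Lay μ Vorbis.WayInv (Vorbis.CodeOK u₀) [.rax, .rcx, .rdx] 2 Vorbis.L.__asan_load2_noabort.entry)
    (others : List Obj) (frames : List (Nat × FrameLayout)) (len : Nat) (Ar : Arena) (stored room : Int)
    (mode : Nat) (ysz : Nat → Nat) (e : State) (ret : Word) (i j k : Nat) (v : State)
    (hat : AtK u₀ others frames len Ar stored room mode ysz e ret i j k v) (hin : ArgsIn e)
    (hk : k < slot32 e v 0x10) :
    ReachVia Lay μ Vorbis.WayInv v (fun w => AtZero u₀ others frames len Ar stored room mode ysz e ret i j k w ∨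
      ∃ b, AtBook u₀ others frames len Ar stored room mode ysz e ret i j k b w) := by
  have he := hat.entry
  v_entry he
  have w_rip := hat.rip
  have hrsp_v : v.reg .rsp = e.reg .rsp - 3000 := hat.rsp
  have w_kept : RegsKept [.rsp] v v := RegsKept.refl _ _
  have w_eq : Mem.EqOn Vorbis.L.textLo Vorbis.L.textHi u₀.mem v.mem := hat.code
  have hdf : v.flags .df = false := (show abiInv _ from hat.abi).1
  have hmx : v.mxcsr &&& 0x1F80 = 0x1F80 := (show abiInv _ from hat.abi).2
  have hsse := Vorbis.sseOK_of_abiInv hat.abi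
  have hr14 : v.reg .r14 = UInt64.ofNat k := hat.r14
  have hcd8 := hat.toKLoop.cdim_le
  have hinv := hat.inv
  have hL := hinv.live
  have a10 : e.reg .rsp - 3000 + 0x10 = e.reg .rsp - 2984 := seg4_sp_10 _
  have a18 : e.reg .rsp - 3000 + 0x18 = e.reg .rsp - 2976 := seg4_sp_18 _
  have a2c : e.reg .rsp - 3000 + 0x2c = e.reg .rsp - 2956 := seg4_sp_2c _
  have a30 : e.reg .rsp - 3000 + 0x30 = e.reg .rsp - 2952 := seg4_sp_30 _
  have a38 : e.reg .rsp - 3000 + 0x38 = e.reg .rsp - 2944 := seg4_sp_38 _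
  obtain ⟨cd, hcd⟩ : ∃ cd : Nat, slot32 e v 0x10 = cd := ⟨_, rfl⟩
  have hcdim : v.mem.readLE (e.reg .rsp - 2984) 4 = cd := by
    rw [← a10]
    exact hcd
  obtain ⟨g, hg⟩ : ∃ g : Nat, slot64 e v 0x18 = g := ⟨_, rfl⟩
  have hgs : v.mem.readLE (e.reg .rsp - 2976) 8 = g := by
    rw [← a18]
    exact hg
  have hgf : IsFloor v.mem (fOf e) g := by
    rw [← hg]
    exact hat.g
  have hfl := hinv.config.floor.floor hgf
  have hjlt : j < Floor1.partitions v.mem g := by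
    rw [← hg]
    exact hat.j_lt
  obtain ⟨cv, hcv⟩ : ∃ cv : Nat, v.mem.readLE (e.reg .rsp - 3000) 4 = cv := ⟨_, rfl⟩
  have hcv32 : cv < 2 ^ 32 := by
    rw [← hcv]
    exact Mem.readLE_lt' _ _ 4
  obtain ⟨pc, hpc⟩ : ∃ pc : Nat, Floor1.partition_class_list v.mem g j = pc := ⟨_, rfl⟩
  have hpcs : v.mem.readLE (e.reg .rsp - 2944) 4 = pc := by
    rw [← a38, ← hpc, ← hg]
    exact hat.slot_pclass
  have hpc16 : pc < 16 := by
    have := hfl.FL5 j hjlt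
    omega
  obtain ⟨cb, hcb⟩ : ∃ cb : Nat, Floor1.class_subclasses v.mem g pc = cb := ⟨_, rfl⟩
  have hcb3 : cb ≤ 3 := by
    have := (hfl.FL6 j hjlt).sub
    rw [hpc, hcb] at this
    exact this
  have hcbs4 : v.mem.readLE (e.reg .rsp - 2956) 4 = cb := by
    have h1 := hat.slot_cbits
    rw [hat.slot_pclass, hg, hpc, hcb] at h1
    rw [← a2c]
    exact h1
  have hcbs : v.mem.readLE (e.reg .rsp - 2956) 1 = cb := Mem.readLE1_of_readLE4_lt _ _ _ hcbs4 (by omega)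
  have hcss : v.mem.readLE (e.reg .rsp - 2952) 4 = 2 ^ cb - 1 := by
    have h1 := hat.slot_csub
    have h2 : slot32 e v 0x2c = cb := by
      show v.mem.readLE (e.reg .rsp - 3000 + 0x2c) 4 = cb
      rw [a2c]
      exact hcbs4
    rw [h2] at h1
    rw [← a30]
    exact h1
  obtain ⟨cs, hcs⟩ : ∃ cs : Nat, 2 ^ cb - 1 = cs := ⟨_, rfl⟩
  rw [hcs] at hcss
  have hcs8 : cs ≤ 7 := by
    have := two_pow_le_8 cb hcb3
    omega
  -- the masked index and the book
  have hidx0 := hfl.book_idx_lt hjlt cv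
  have hbr0 := hfl.book_range hjlt cv
  rw [hpc, hcb, hcs] at hidx0 hbr0
  simp only [voff] at hidx0
  have hidx : (cv % 2 ^ 32) &&& (cs % 2 ^ 32) < 8 := by
    rw [Nat.mod_eq_of_lt hcv32, Nat.mod_eq_of_lt (by omega)]
    exact hidx0
  have hfsh := hinv.config.floor.toFloorShape
  have hgins := hfsh.elem_inside hgf hinv.ok
  have hgin := hfsh.elem_in hgf (off := 0) (n := Off.sizeof.Floor) (Nat.le_refl _)
  have hfboff := hinv.offStack _ hfsh.FL2
  simp only [voff, Block.contains, Nat.add_zero] at hgins hgin hfboff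
  have hgw : g + 1596 ≤ 0xC00000 ∧ (g + 1596 ≤ 0x700000 ∨ 0x800000 ≤ g) := by omega
  have hA := sb_addr g cv cs pc hidx hpc16 (by omega)
  rw [Nat.mod_eq_of_lt hcv32, Nat.mod_eq_of_lt (show cs < 2 ^ 32 by omega)] at hA
  obtain ⟨idx, hidxe⟩ : ∃ idx : Nat, cv &&& cs = idx := ⟨_, rfl⟩
  rw [hidxe] at hA hidx0 hbr0
  obtain ⟨bk, hbk⟩ : ∃ bk : Nat, v.mem.readLE (UInt64.ofNat g +
      (Word.ofBV (BitVec.signExtend 64 (BitVec.ofNat 32 cv &&& BitVec.ofNat 32 cs)) +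
        Word.ofBV (BitVec.signExtend 64 (BitVec.ofNat 32 pc)) * 8 + 40) * 2 + 2) 2 = bk := ⟨_, rfl⟩
  have hbk16 : bk < 65536 := by
    rw [← hbk]
    exact Mem.readLE_lt' _ _ 2
  clear hfboff hgin hgins
  u_walk hcode [hμ.vendor] until [Vorbis.L.vorbis_decode_packet_rest.cut8, cutZero, cutBook] span [Vorbis.L.textLo, Vorbis.L.textHi] side (v_side)
  · -- 0x110d3a: load2 g + 82 + 2·(8·pclass + (cval & csub))
    have hun : ShadowUntouched v.mem s_110d3a.mem := by v_untouched
    have hs : Site (LiveSet others (framesIn frames e)) (g + 82 + 2 * (8 * pc + idx)) 2 :=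
      hfsh.site_elem hL hgf (82 + 2 * (8 * pc + idx)) 2 (by simp only [voff]; omega) (by omega) (by omega)
    exact check_site hat.shadow hun hs hA
  · -- `k ≥ cdim` contradicts `k < cdim`
    exfalso
    rw [hcd] at hk
    rw [seg4_part32_ofNat k (by omega), toInt_ofNat32 cd (by omega), toInt_ofNat32 k (by omega)] at hbr_110d11
    rcases sint32_cases cd with h1 | h1
    · rcases sint32_cases k with h2 | h2
      · omega
      · omega
    · omega
  · -- `book < 0`: to `finalY[offset++] = 0`
    refine ReachVia.done (Or.inl ?_)
    obtain ⟨hbody, _, _, ecd⟩ := kloop_at_test hat.toKLoop he_room he_top hin w_rsp w_eq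
      (by show (Vorbis.conv u₀).inv _; v_inv) (w_kept.get .rbp rfl) (w_kept.get .r14 rfl) _ _ w_mem
    exact ⟨hbody, w_rip, by rw [ecd]; exact hk⟩
  · -- `book ≥ 0`
    refine ReachVia.done (Or.inr ⟨bk, ?_⟩)
    obtain ⟨hbody, _, ecc, ecd⟩ := kloop_at_test hat.toKLoop he_room he_top hin w_rsp w_eq
      (by show (Vorbis.conv u₀).inv _; v_inv) (w_kept.get .rbp rfl) (w_kept.get .r14 rfl) _ _ w_mem
    have hb15 : bk < 32768 := by
      have h1 := bit15_clear (BitVec.ofNat 16 bk) hbr_110d56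
      rw [BitVec.toNat_ofNat] at h1
      omega
    refine ⟨hbody, w_rip, by rw [ecd]; exact hk, ?_, hb15, ?_⟩
    · rw [w_rbx]
      exact zext16_reg bk hbk16
    · rw [ecc]
      have e1 : Floor1.subclass_books v.mem g pc idx = (bk : Int) := by
        simp only [vacc, voff]
        unfold Mem.i16 Mem.u16
        rw [← eq_addr _ _ hA, hbk]
        exact sint16_small bk hb15
      rw [← e1]
      exact hbr0.2

/-- **The `book < 0` arm, PROVED (under `ArgsIn`)**: 0x110e31–0x110e56 + 0x110d06, `finalY[offset++] = 0` (the same check as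
sub-segment E: FL8 `offset_lt`, FY1), `++k`; the loop head again by `KLoop.step`. -/
theorem segZ {Lay : Layout} (hLay : Lay.hi = 0x1000000) {μ : Microarch} (hμ : UserX.MicroOK μ) {u₀ : State}
    (hcode : HasCodeNat Lay u₀ Vorbis.L.vorbis_decode_packet_rest.entry Vorbis.Code.code_vorbis_decode_packet_rest.nat Vorbis.L.vorbis_decode_packet_rest.size)
    (hs2 : Asan.SmallCheck Lay μ Vorbis.WayInv (Vorbis.CodeOK u₀) [.rax, .rcx, .rdx] 2 Vorbis.L.__asan_store2_noabort.entry) :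
    ∀ (others : List Obj) (frames : List (Nat × FrameLayout)) (len : Nat) (Ar : Arena) (stored room : Int)
      (mode : Nat) (ysz : Nat → Nat) (e : State) (ret : Word) (i j k : Nat) (v : State),
    AtZero u₀ others frames len Ar stored room mode ysz e ret i j k v → ArgsIn e →
    ReachVia Lay μ Vorbis.WayInv v (fun w => AtK u₀ others frames len Ar stored room mode ysz e ret i j (k + 1) w) := by
  intro others frames len Ar stored room mode ysz e ret i j k v hat hin
  have he := hat.entry
  v_entry he
  have w_rip := hat.rip
  have w_rsp : v.reg .rsp = e.reg .rsp - 3000 := hat.rsp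
  have hrsp_v : v.reg .rsp = e.reg .rsp - 3000 := hat.rsp
  have w_eq : Mem.EqOn Vorbis.L.textLo Vorbis.L.textHi u₀.mem v.mem := hat.code
  have hdf : v.flags .df = false := (show abiInv _ from hat.abi).1
  have hmx : v.mxcsr &&& 0x1F80 = 0x1F80 := (show abiInv _ from hat.abi).2
  have hsse := Vorbis.sseOK_of_abiInv hat.abi
  have hr14 : v.reg .r14 = UInt64.ofNat k := hat.r14
  obtain ⟨hsh, hinv0, hargs⟩ := hat.pre
  have hinv := hat.inv
  have hok := hinv.ok
  have hL := hinv.live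
  have hi := hat.i_lt
  -- the floor, the offset, the finalY block
  obtain ⟨g, hg⟩ : ∃ g : Nat, slot64 e v 0x18 = g := ⟨_, rfl⟩
  have hgf : IsFloor v.mem (fOf e) g := by
    rw [← hg]
    exact hat.g
  have hfl := hinv.config.floor.floor hgf
  obtain ⟨off, hoff⟩ : ∃ off : Nat, 2 + Floor1.dimSum v.mem g j + k = off := ⟨_, rfl⟩
  have a8 : e.reg .rsp - 3000 + 0x8 = e.reg .rsp - 2992 := seg4_sp_8 _
  have a20 : e.reg .rsp - 3000 + 0x20 = e.reg .rsp - 2968 := seg4_sp_20 _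
  have hoffs : v.mem.readLE (e.reg .rsp - 2992) 4 = off := by
    rw [← a8, ← hoff, ← hg]
    exact hat.slot_offset
  obtain ⟨y, hy⟩ : ∃ y : Nat, stb_vorbis.finalY v.mem (fOf e) i = y := ⟨_, rfl⟩
  have hys : v.mem.readLE (e.reg .rsp - 2968) 8 = y := by
    rw [← a20, ← hy]
    exact hat.slot_finalY
  -- `offset < values`, and the block holds `2·values` bytes (FL8, FY1)
  have hklt : k < Floor1.class_dimensions v.mem g (Floor1.partition_class_list v.mem g j) := by
    have h1 := hat.k_lt
    rw [hat.slot_cdim, hat.slot_pclass, hg] at h1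
    exact h1
  have hjlt : j < Floor1.partitions v.mem g := by
    rw [← hg]
    exact hat.j_lt
  have hofflt := hfl.offset_lt hjlt hklt
  rw [hoff] at hofflt
  have hvb := hfl.values_bounds
  obtain ⟨hyb, hysz⟩ := hinv.fy i hi
  rw [hy] at hyb
  have hysz' : 2 * Floor1.values v.mem g ≤ (ysz i : Int) := by
    obtain ⟨idx, hidx, rfl⟩ := hgf
    exact hysz idx hidx
  have hyins := hok.inside _ hyb
  have hyoff := hinv.offStack _ hyb
  simp only [vblock] at hyins
  simp only [] at hyoff
  have hywhere := (LiveBytes.of_block (a := y) (n := ysz i) (hL _ hyb) (Nat.le_refl _) (Nat.le_refl _)).where_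
    hat.shadow hsh.offText (by omega) (by u_omega)
  have hya := y_addr y off (by omega) (by omega)
  have hfoff := hinv.objOff
  simp only [voff] at hfoff
  have hyobj := hinv.sep.bufobj _ (SampleBuf.finalY i hi (ysz i) (hy ▸ hyb))
  rw [hy] at hyobj
  simp only [vblock, voff] at hyobj
  u_walk hcode [hμ.vendor] until [Vorbis.L.vorbis_decode_packet_rest.cut7] span [Vorbis.L.textLo, Vorbis.L.textHi] side (v_side)
  · -- 0x110e46: store2 finalY + 2·offset
    have hun : ShadowUntouched v.mem s_110e46.mem := by v_untouched
    have hs : Site (LiveSet others (framesIn frames e)) (y + 2 * off) 2 :=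
      Site.of_blk hL hyb (by simp only []; omega) (by simp only []; omega) (by omega)
    exact check_site hat.shadow hun hs hya
  · -- the back edge: the loop head with `k + 1`
    refine ReachVia.done ?_
    have hsame : Mem.SameExcept [⟨(e.reg .rsp).toNat - 3856, (e.reg .rsp).toNat - 3000 + 12⟩,
        ⟨fOf e + 48, fOf e + 56⟩, ⟨fOf e + 84, fOf e + 96⟩, ⟨fOf e + 136, fOf e + 144⟩, ⟨fOf e + 1484, fOf e + 1749⟩,
        ⟨fOf e + 1752, fOf e + 1784⟩, ⟨y, y + ysz i⟩] v.mem s_110d06.mem := by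
      u_same
    have hsame2 : Mem.SameExcept [⟨(e.reg .rsp).toNat - 3856, (e.reg .rsp).toNat - 3000 + 12⟩, ⟨y, y + ysz i⟩]
        v.mem s_110d06.mem := by
      u_same
    have hb : Bits (RunBlk Ar len) len s_110d06.mem (fOf e) := by
      apply hinv.fb.vorbis.bits.frame_fields
      apply Bits.SameFields.of_sameExcept hsame2
      all_goals
        intro w hw
        simp only [List.mem_cons, List.mem_nil_iff, or_false] at hw
        rcases hw with rfl | rfl <;> simp only [] <;> omega
    have hoff' : slot32 e s_110d06 0x8 = 2 + Floor1.dimSum v.mem (slot64 e v 0x18) j + (k + 1) := by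
      rw [hg, ← Nat.add_assoc, hoff]
      show s_110d06.mem.readLE (e.reg .rsp - 3000 + 0x8) 4 = off + 1
      rw [a8, w_mem, Mem.readLE_writeLE_same _ _ _ _ (by omega), off_succ off (by omega)]
      omega
    refine ⟨?_, w_rip⟩
    apply hat.toKLoop.step he_room he_top hin w_rsp w_eq ?_ ?_ ?_ ?_ (hy ▸ hsame) hoff' hb
    · show (Vorbis.conv u₀).inv _
      v_inv
    · rw [w_kept.get .rbp rfl]
      exact hat.rbp
    · rw [w_r14]
      exact k_succ k (by have := hat.toKLoop.cdim_le; have := hat.k_lt; omega)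
    · exact hat.k_lt



/-! ### Sub-segment C: the inline DECODE -/

/-- `and r12d, 0x3ff ; add r12, 0x18 ; lea rdi, [rbx + r12*2]`: the address of `c->fast_huffman[acc & 1023]`. -/
theorem fh_addr (c acc : Nat) (hacc : acc < 2 ^ 32) (hc : c + 2120 < 2 ^ 64) :
    (addr c + (Word.ofBV (BitVec.setWidth 64 (BitVec.ofNat 32 acc &&& 1023#32)) + 24) * 2).toNat
      = c + 48 + 2 * (acc &&& 1023) := by
  have h1 : acc &&& 1023 ≤ 1023 := Nat.and_le_right
  have e1 : (Word.ofBV (BitVec.setWidth 64 (BitVec.ofNat 32 acc &&& 1023#32))).toNat = acc &&& 1023 := by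
    unfold Word.ofBV
    simp only [UInt64.toNat_ofBitVec, BitVec.toNat_setWidth, BitVec.toNat_and, BitVec.toNat_ofNat]
    have e2 : acc % 2 ^ 32 = acc := Nat.mod_eq_of_lt hacc
    rw [e2]
    have e3 : 1023 % 2 ^ 32 = 1023 := by decide
    rw [e3]
    omega
  have c24 : (24 : Word).toNat = 24 := rfl
  have c2 : (2 : Word).toNat = 2 := rfl
  unfold addr
  rw [UInt64.toNat_add, UInt64.toNat_mul, UInt64.toNat_add, e1, c24, c2, UInt64.toNat_ofNat']
  omega

/-- `movsx r12d, r13w ; test r12d, r12d ; js`: the sign flag is clear ⇒ bit 15 of the loaded `int16` is clear. -/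
theorem fh_small (x : BitVec 16)
    (h : (BitVec.signExtend 32 (BitVec.setWidth 16 (BitVec.zeroExtend 32 x))).msb = false) : x.toNat < 32768 := by
  have h1 : x < 32768#16 := by
    bv_decide
  exact BitVec.lt_def.mp h1

/-- … and set ⇒ bit 15 is set. -/
theorem fh_big (x : BitVec 16)
    (h : (BitVec.signExtend 32 (BitVec.setWidth 16 (BitVec.zeroExtend 32 x))).msb = true) : 32768 ≤ x.toNat := by
  have h1 : 32768#16 ≤ x := by
    bv_decide
  exact BitVec.le_def.mp h1

/-- The sign-extended non-negative `int16` in `r12d`, read as an `int`: the number. -/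
theorem fh_argInt (fh : Nat) (h : fh < 32768) :
    argInt (Word.ofBV (BitVec.signExtend 32 (BitVec.setWidth 16 (BitVec.zeroExtend 32 (BitVec.ofNat 16 fh))))) = (fh : Int) := by
  have e0 : (BitVec.ofNat 16 fh).toNat = fh := by
    rw [BitVec.toNat_ofNat]
    exact Nat.mod_eq_of_lt (by omega)
  have hlt : BitVec.ofNat 16 fh < 32768#16 := by
    apply BitVec.lt_def.mpr
    rw [e0]
    exact h
  generalize BitVec.ofNat 16 fh = x at *
  have e1 : BitVec.signExtend 32 (BitVec.setWidth 16 (BitVec.zeroExtend 32 x)) = BitVec.zeroExtend 32 x := by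
    bv_decide
  rw [e1]
  unfold argInt
  rw [toNat_ofBV32]
  simp only [BitVec.toNat_setWidth, BitVec.truncate_eq_setWidth, e0]
  have e2 : fh % 2 ^ 32 % 2 ^ 32 = fh := by omega
  rw [e2]
  rcases sint32_cases fh with h1 | h1
  · exact h1.2
  · omega

/-- `movsx r13, r13w ; add r13, [rbx + 8]`: the address of `c->codeword_lengths[var]` for a non-negative `var`. -/
theorem la_addr (fh cl : Nat) (h : fh < 32768) (hcl : cl + fh < 2 ^ 64) :
    (Word.ofBV (BitVec.signExtend 64 (BitVec.setWidth 16 (BitVec.zeroExtend 32 (BitVec.ofNat 16 fh)))) + UInt64.ofNat cl).toNat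
      = cl + fh := by
  have e0 : (BitVec.ofNat 16 fh).toNat = fh := by
    rw [BitVec.toNat_ofNat]
    exact Nat.mod_eq_of_lt (by omega)
  have hlt : BitVec.ofNat 16 fh < 32768#16 := by
    apply BitVec.lt_def.mpr
    rw [e0]
    exact h
  generalize BitVec.ofNat 16 fh = x at *
  have e1 : BitVec.signExtend 64 (BitVec.setWidth 16 (BitVec.zeroExtend 32 x)) = BitVec.zeroExtend 64 x := by
    bv_decide
  rw [e1, UInt64.toNat_add, UInt64.toNat_ofNat']
  unfold Word.ofBV
  simp only [UInt64.toNat_ofBitVec, BitVec.toNat_setWidth, BitVec.truncate_eq_setWidth, e0]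
  omega

/-- `sub eax, r13d` with `eax = valid_bits ∈ [−1, 32]` and a zero-extended byte, sign flag clear: V1 for the new `valid_bits`. -/
theorem seg4_vb_sub (a : BitVec 32) (y : BitVec 8) (ha : -1 ≤ a.toInt ∧ a.toInt ≤ 32)
    (hm : (a - BitVec.zeroExtend 32 (BitVec.setWidth 8 (BitVec.zeroExtend 32 y))).msb = false) :
    -1 ≤ (a - BitVec.zeroExtend 32 (BitVec.setWidth 8 (BitVec.zeroExtend 32 y))).toInt ∧
      (a - BitVec.zeroExtend 32 (BitVec.setWidth 8 (BitVec.zeroExtend 32 y))).toInt ≤ 32 := by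
  have h1 : (4294967295#32).sle a = true := by
    unfold BitVec.sle
    have e : (4294967295#32).toInt = -1 := by decide
    rw [e]
    exact decide_eq_true ha.1
  have h2 : a.sle 32#32 = true := by
    unfold BitVec.sle
    have e : (32#32).toInt = 32 := by decide
    rw [e]
    exact decide_eq_true ha.2
  have h3 : (0#32).sle (a - BitVec.zeroExtend 32 (BitVec.setWidth 8 (BitVec.zeroExtend 32 y))) = true ∧
      (a - BitVec.zeroExtend 32 (BitVec.setWidth 8 (BitVec.zeroExtend 32 y))).sle 32#32 = true := by
    bv_decide
  unfold BitVec.sle at h3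
  have e0 : (0#32).toInt = 0 := by decide
  have e32 : (32#32).toInt = 32 := by decide
  rw [e0, e32] at h3
  have h4 := of_decide_eq_true h3.1
  have h5 := of_decide_eq_true h3.2
  omega


/-- 0x110c9f (`mov rsi,rbx`, line 3258): DECODE #2's slow path, before the call of codebook_decode_scalar_raw. -/
abbrev cutSlow : Word := 0x110c9f

/-- **0x110c9f, before `codebook_decode_scalar_raw(f, c)`** (line 3258): as `AtDec`. -/
structure AtSlow (u₀ : State) (others : List Obj) (frames : List (Nat × FrameLayout)) (len : Nat) (Ar : Arena)
    (stored room : Int) (mode : Nat) (ysz : Nat → Nat) (u : State) (ret : Word)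
    (i j k b : Nat) (v : State) : Prop
    extends KLoop u₀ others frames len Ar stored room mode ysz u ret i j k v where
  rip : v.rip = cutSlow
  k_lt : k < slot32 u v 0x10
  rbx : (v.reg .rbx).toNat = stb_vorbis.codebooks_at v.mem (fOf u) b
  book_lt : (b : Int) < stb_vorbis.codebook_count v.mem (fOf u)

/-- **`Bits` after the inline DECODE's two stores** (`acc >>= len` at `f + 0x6e4`, then `valid_bits` at `f + 0x6e8`, return
addresses of check calls in between): `Bits.frame_fields` for everything before the last store, `Bits.store_valid_bits` for it. -/
theorem bits_after_fast {Blk : Block → Prop} {len : Nat} {m m3 : Mem} {f lo hi : Nat} (hb : Bits Blk len m f)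
    (hs : Mem.SameExcept [⟨lo, hi⟩, ⟨f + 1764, f + 1768⟩] m m3) (hoff : hi ≤ f ∨ f + 1808 ≤ lo)
    (x : BitVec 32) (hx : -1 ≤ x.toInt ∧ x.toInt ≤ 32) :
    Bits Blk len (m3.writeLE (addr f + 1768) 4 x.toNat) f := by
  have hb3 : Bits Blk len m3 f := by
    apply hb.frame_fields
    apply Bits.SameFields.of_sameExcept hs
    all_goals
      intro w hw
      simp only [List.mem_cons, List.mem_nil_iff, or_false] at hw
      rcases hw with rfl | rfl <;> simp only [] <;> omega
  rw [addr_add_lit]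
  exact (hb3.store_valid_bits x hx).1

/-- **Sub-segment C, the inline part, PROVED (under `ArgsIn`)**: 0x110d93–0x110e2c: the fast-huffman lookup (checks 0x110d9a, 0x110db8,
0x110dd3, 0x110de3 — K5 through `site_lengths_of_fast` —, 0x110e02); `var < 0` → `AtSlow`; else `acc >>= len`, `valid_bits -= len`
(`bits_after_fast`, `seg4_vb_sub`), underflow → `valid_bits = 0`, `var = −1` → `AtVar` (`decodeRaw_fast`, N(c) by `SameFields.N`). -/
theorem segC_fast {Lay : Layout} (hLay : Lay.hi = 0x1000000) {μ : Microarch} (hμ : UserX.MicroOK μ) {u₀ : State}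
    (hcode : HasCodeNat Lay u₀ Vorbis.L.vorbis_decode_packet_rest.entry Vorbis.Code.code_vorbis_decode_packet_rest.nat Vorbis.L.vorbis_decode_packet_rest.size)
    (hl1 : Asan.SmallCheck Lay μ Vorbis.WayInv (Vorbis.CodeOK u₀) [.rax, .rdx] 1 Vorbis.L.__asan_load1_noabort.entry)
    (hl2 : Asan.SmallCheck Lay μ Vorbis.WayInv (Vorbis.CodeOK u₀) [.rax, .rcx, .rdx] 2 Vorbis.L.__asan_load2_noabort.entry)
    (hl8 : Asan.SmallCheck Lay μ Vorbis.WayInv (Vorbis.CodeOK u₀) [.rax, .rcx, .rdx] 8 Vorbis.L.__asan_load8_noabort.entry)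
    (hl4 : Asan.SmallCheck Lay μ Vorbis.WayInv (Vorbis.CodeOK u₀) [.rax, .rcx, .rdx] 4 Vorbis.L.__asan_load4_noabort.entry)
    (others : List Obj) (frames : List (Nat × FrameLayout)) (len : Nat) (Ar : Arena) (stored room : Int)
    (mode : Nat) (ysz : Nat → Nat) (e : State) (ret : Word) (i j k b : Nat) (v : State)
    (hat : AtDec u₀ others frames len Ar stored room mode ysz e ret i j k b v) (hin : ArgsIn e) :
    ReachVia Lay μ Vorbis.WayInv v (fun w => AtVar u₀ others frames len Ar stored room mode ysz e ret i j k b w ∨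
      AtSlow u₀ others frames len Ar stored room mode ysz e ret i j k b w) := by
  have he := hat.entry
  v_entry he
  have w_rip := hat.rip
  have hrsp_v : v.reg .rsp = e.reg .rsp - 3000 := hat.rsp
  have w_kept : RegsKept [.rsp] v v := RegsKept.refl _ _
  have w_eq : Mem.EqOn Vorbis.L.textLo Vorbis.L.textHi u₀.mem v.mem := hat.code
  have hdf : v.flags .df = false := (show abiInv _ from hat.abi).1
  have hmx : v.mxcsr &&& 0x1F80 = 0x1F80 := (show abiInv _ from hat.abi).2
  have hsse := Vorbis.sseOK_of_abiInv hat.abi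
  obtain ⟨hsh, hinv0, hargs⟩ := hat.pre
  have hinv := hat.inv
  have hok := hinv.ok
  have hL := hinv.live
  have hbits := hinv.fb.vorbis.bits
  obtain ⟨f, hf⟩ : ∃ f : Nat, fOf e = f := ⟨_, rfl⟩
  rw [hf] at hinv hbits
  have hrbp : v.reg .rbp = addr f := eq_addr _ _ (by rw [hat.rbp, hf])
  have hfoff := hinv.objOff
  have hfr := hbits.OBR
  simp only [voff] at hfoff hfr
  have hfw : f + 1808 ≤ 0xC00000 ∧ (f + 1808 ≤ 0x700000 ∨ 0x800000 ≤ f) := ⟨hfr.2, hfoff⟩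
  clear hfoff
  have hfn : (addr f).toNat = f := toNat_addr f (by omega)
  -- the codebook
  obtain ⟨c, hc⟩ : ∃ c : Nat, stb_vorbis.codebooks_at v.mem f b = c := ⟨_, rfl⟩
  have hrbxn : (v.reg .rbx).toNat = c := by rw [hat.rbx, hf, hc]
  have hrbx : v.reg .rbx = addr c := eq_addr _ _ hrbxn
  have hcb := hinv.fb.vorbis.codebooks
  have hblt : (b : Int) < stb_vorbis.codebook_count v.mem f := by
    rw [← hf]
    exact hat.book_lt
  obtain ⟨B, hB, hBin⟩ := CodebooksUpTo.book_in (groups_laws len) hcb hblt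
  rw [hc] at hBin
  have hcok : CodebookOK (RunBlk Ar len) v.mem c := by
    have := hcb.ok b (by omega)
    rw [hc] at this
    exact this
  have hBoff := hinv.offStack B hB
  have hBins := hinv.ok.inside B hB
  simp only [vblock, voff] at hBin hBins
  have hcw : c + 2120 ≤ 0xC00000 ∧ (c + 2120 ≤ 0x700000 ∨ 0x800000 ≤ c) := by omega
  have hcn : (addr c).toNat = c := toNat_addr c (by omega)
  obtain ⟨acc, hacc⟩ : ∃ acc : Nat, v.mem.readLE (addr f + 0x6e4) 4 = acc := ⟨_, rfl⟩
  obtain ⟨vb, hvb⟩ : ∃ vb : Nat, v.mem.readLE (addr f + 0x6e8) 4 = vb := ⟨_, rfl⟩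
  obtain ⟨cl, hcl⟩ : ∃ cl : Nat, v.mem.readLE (addr c + 0x8) 8 = cl := ⟨_, rfl⟩
  have hacc32 : acc < 2 ^ 32 := by
    rw [← hacc]
    exact Mem.readLE_lt' _ _ 4
  have hfa := fh_addr c acc hacc32 (by omega)
  obtain ⟨k10, hk10⟩ : ∃ k10 : Nat, acc &&& 1023 = k10 := ⟨_, rfl⟩
  have hk10lt : k10 < 1024 := by
    rw [← hk10]
    exact Nat.lt_succ_of_le Nat.and_le_right
  rw [hk10] at hfa
  obtain ⟨fh, hfh⟩ : ∃ fh : Nat, v.mem.readLE (addr c + (Word.ofBV (BitVec.setWidth 64 (BitVec.ofNat 32 acc &&& 1023#32)) + 24) * 2) 2 = fh := ⟨_, rfl⟩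
  have hfh16 : fh < 65536 := by
    rw [← hfh]
    exact Mem.readLE_lt' _ _ 2
  have hBin0 : B.contains c Off.sizeof.Codebook := by
    simp only [vblock, voff]
    exact hBin
  have hapart := (hinv.books b hblt).book
  rw [hc] at hapart
  simp only [vblock, voff, Block.disjoint] at hapart
  -- the table entry `var = c->fast_huffman[acc & 1023]`, and K5
  have hfhv : Codebook.fast_huffman v.mem c k10 = sint16 fh := by
    simp only [vacc, voff]
    unfold Mem.i16 Mem.u16
    rw [← eq_addr _ _ hfa, hfh]
  have hclv : Codebook.codeword_lengths v.mem c = cl := by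
    simp only [vacc, voff]
    unfold Mem.u64
    rw [← hcl, ← addr_add_lit]
  have hV1 := hbits.V1
  have hvbv : stb_vorbis.valid_bits v.mem f = (BitVec.ofNat 32 vb).toInt := by
    simp only [vacc, voff]
    unfold Mem.i32 Mem.u32
    rw [← addr_add_lit, hvb, toInt_ofNat32 vb (by rw [← hvb]; exact Mem.readLE_lt' _ _ 4)]
  rw [hvbv] at hV1
  have hk8 := hat.toKLoop.cdim_le
  clear hBoff hBins
  u_walk hcode [hμ.vendor] until [cutVar, cutSlow] span [Vorbis.L.textLo, Vorbis.L.textHi] side (v_side)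
  · -- 0x110d9a: load4 f + 0x6e4 (`f->acc`)
    have hun : ShadowUntouched v.mem s_110d9a.mem := by v_untouched
    exact check_site hat.shadow hun (hbits.site_field hL 1764 4 (by omega) (by omega) rfl) (by u_omega)
  · -- 0x110db8: load2 c + 48 + 2·(acc & 1023) (`c->fast_huffman[…]`)
    have hun : ShadowUntouched v.mem s_110db8.mem := by v_untouched
    have hs : Site (LiveSet others (framesIn frames e)) (c + 48 + 2 * k10) 2 :=
      Codebook.site_fast_huffman hL hB hBin0 k10 hk10lt (by simp only [voff])
    exact check_site hat.shadow hun hs hfa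
  · -- 0x110dd3: load8 c + 8 (`c->codeword_lengths`)
    have hun : ShadowUntouched v.mem s_110dd3.mem := by v_untouched
    have hs := Codebook.site_field hL hB hBin0 8 8 (by simp only [voff]; omega) (by omega) (a := c + 8) rfl
    exact check_site hat.shadow hun hs (by u_omega)
  · -- 0x110de3: load1 codeword_lengths + var, `var ≥ 0` (K5)
    have hun : ShadowUntouched v.mem s_110de3.mem := by v_untouched
    have hfs : fh < 32768 := by
      have h1 := fh_small (BitVec.ofNat 16 fh) hbr_110dc9
      rw [BitVec.toNat_ofNat] at h1
      omega
    have hv0 : 0 ≤ Codebook.fast_huffman v.mem c k10 := by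
      rw [hfhv, sint16_small fh hfs]
      exact Int.natCast_nonneg _
    have hs : Site (LiveSet others (framesIn frames e)) (cl + fh) 1 := by
      apply hcok.site_lengths_of_fast hL k10 hk10lt hv0
      rw [hfhv, sint16_small fh hfs, Int.toNat_natCast]
      simp only [Codebook.codeword_lengths_at]
      rw [hclv]
    have hsi := hs.inside hinv.fb.env.covers
    exact check_site hat.shadow hun hs (la_addr fh cl hfs (by omega))
  · -- 0x110e02: load4 f + 0x6e8 (`f->valid_bits`)
    have hun : ShadowUntouched v.mem s_110e02.mem := by v_untouched
    exact check_site hat.shadow hun (hbits.site_field hL 1768 4 (by omega) (by omega) rfl) (by u_omega)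
  · -- `var < 0`: to the slow path
    refine ReachVia.done (Or.inr ?_)
    have hsame : Mem.SameExcept [⟨(e.reg .rsp).toNat - 3856, (e.reg .rsp).toNat - 3000⟩] v.mem s_110dc9.mem := by
      u_same
    obtain ⟨hbody, ecb, ecc, ecd⟩ := hat.toKLoop.stackOnly' he_room he_top hin w_rsp w_eq
      (by show (Vorbis.conv u₀).inv _; v_inv) (w_kept.get .rbp rfl) (w_kept.get .r14 rfl) hsame
    refine ⟨hbody, w_rip, by rw [ecd]; exact hat.k_lt, ?_, by rw [ecc]; exact hat.book_lt⟩
    unfold stb_vorbis.codebooks_at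
    rw [ecb, w_kept.get .rbx rfl, hat.rbx]
    rfl
  · -- `valid_bits − len ≥ 0`: `var` is the table entry
    refine ReachVia.done (Or.inl ?_)
    have hfs : fh < 32768 := by
      have h1 := fh_small (BitVec.ofNat 16 fh) hbr_110dc9
      rw [BitVec.toNat_ofNat] at h1
      omega
    have hsame : Mem.SameExcept [⟨(e.reg .rsp).toNat - 3856, (e.reg .rsp).toNat - 3000 + 12⟩,
        ⟨f + 48, f + 56⟩, ⟨f + 84, f + 96⟩, ⟨f + 136, f + 144⟩, ⟨f + 1484, f + 1749⟩,
        ⟨f + 1752, f + 1784⟩,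
        ⟨stb_vorbis.finalY v.mem f i, stb_vorbis.finalY v.mem f i + ysz i⟩] v.mem s_110e16.mem := by
      u_same
    have hsame2 : Mem.SameExcept [⟨(e.reg .rsp).toNat - 3856, (e.reg .rsp).toNat - 3000⟩, ⟨f + 1764, f + 1772⟩]
        v.mem s_110e16.mem := by
      u_same
    have hb : Bits (RunBlk Ar len) len s_110e16.mem f := by
      rw [w_mem]
      exact bits_after_fast hbits (lo := (e.reg .rsp).toNat - 3856) (hi := (e.reg .rsp).toNat - 3000) (by u_same)
        (by omega) _ (seg4_vb_sub _ _ hV1 hbr_110e16)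
    have hso : slot32 e s_110e16 0x8 = slot32 e v 0x8 := by
      apply hsame2.readLE _ 4 (by u_omega)
      intro w hw
      simp only [List.mem_cons, List.mem_nil_iff, or_false] at hw
      rcases hw with rfl | rfl <;> simp only [] <;> u_omega
    obtain ⟨hbody, ecb, ecc, ecd⟩ := hat.toKLoop.step' (k' := k) he_room he_top hin w_rsp w_eq
      (by show (Vorbis.conv u₀).inv _; v_inv)
      (by rw [w_kept.get .rbp rfl]; exact hat.rbp)
      (by rw [w_kept.get .r14 rfl]; exact hat.r14) hat.k_le
      (by rw [hf]; exact hsame)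
      (by rw [hso]; exact hat.slot_offset)
      (by rw [hf]; exact hb)
    have hsf : Codebook.SameFields v.mem s_110e16.mem c := by
      apply Codebook.SameFields.of_sameExcept_off hsame2 (by omega)
      intro w hw
      simp only [List.mem_cons, List.mem_nil_iff, or_false] at hw
      rcases hw with rfl | rfl <;> simp only [] <;> omega
    have ecat : stb_vorbis.codebooks_at s_110e16.mem (fOf e) b = c := by
      unfold stb_vorbis.codebooks_at
      rw [ecb, hf]
      exact hc
    refine ⟨hbody, w_rip, by rw [ecd]; exact hat.k_lt, ?_, by rw [ecc]; exact hat.book_lt, ?_⟩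
    · rw [ecat, w_kept.get .rbx rfl]
      exact hrbxn
    · rw [ecat, w_r12, fh_argInt fh hfs]
      have h1 := hcok.decodeRaw_fast k10 hk10lt
      rw [hfhv, sint16_small fh hfs] at h1
      unfold DecodeRawResult at h1 ⊢
      rw [hsf.N]
      exact h1
  · -- underflow: `valid_bits = 0`, `var = −1`
    refine ReachVia.done (Or.inl ?_)
    have hsame : Mem.SameExcept [⟨(e.reg .rsp).toNat - 3856, (e.reg .rsp).toNat - 3000 + 12⟩,
        ⟨f + 48, f + 56⟩, ⟨f + 84, f + 96⟩, ⟨f + 136, f + 144⟩, ⟨f + 1484, f + 1749⟩,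
        ⟨f + 1752, f + 1784⟩,
        ⟨stb_vorbis.finalY v.mem f i, stb_vorbis.finalY v.mem f i + ysz i⟩] v.mem s_110e2c.mem := by
      u_same
    have hsame2 : Mem.SameExcept [⟨(e.reg .rsp).toNat - 3856, (e.reg .rsp).toNat - 3000⟩, ⟨f + 1764, f + 1772⟩]
        v.mem s_110e2c.mem := by
      u_same
    have hb : Bits (RunBlk Ar len) len s_110e2c.mem f := by
      rw [w_mem]
      exact bits_after_fast hbits (lo := (e.reg .rsp).toNat - 3856) (hi := (e.reg .rsp).toNat - 3000) (by u_same)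
        (by omega) 0#32 (by decide)
    have hso : slot32 e s_110e2c 0x8 = slot32 e v 0x8 := by
      apply hsame2.readLE _ 4 (by u_omega)
      intro w hw
      simp only [List.mem_cons, List.mem_nil_iff, or_false] at hw
      rcases hw with rfl | rfl <;> simp only [] <;> u_omega
    obtain ⟨hbody, ecb, ecc, ecd⟩ := hat.toKLoop.step' (k' := k) he_room he_top hin w_rsp w_eq
      (by show (Vorbis.conv u₀).inv _; v_inv)
      (by rw [w_kept.get .rbp rfl]; exact hat.rbp)
      (by rw [w_kept.get .r14 rfl]; exact hat.r14) hat.k_le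
      (by rw [hf]; exact hsame)
      (by rw [hso]; exact hat.slot_offset)
      (by rw [hf]; exact hb)
    have ecat : stb_vorbis.codebooks_at s_110e2c.mem (fOf e) b = c := by
      unfold stb_vorbis.codebooks_at
      rw [ecb, hf]
      exact hc
    refine ⟨hbody, w_rip, by rw [ecd]; exact hat.k_lt, ?_, by rw [ecc]; exact hat.book_lt, ?_⟩
    · rw [ecat, w_kept.get .rbx rfl]
      exact hrbxn
    · rw [w_r12, argInt_neg_one]
      exact Or.inl rfl

/-- **Sub-segment C, the slow path, PROVED (under `ArgsIn`)**: 0x110c9f–0x110caa, `var = codebook_decode_scalar_raw(f, c)`: its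
precondition `BookPre` by `PacketRestTest.bookPre_of_inv` (the invariant over the pushed return address: `seg4_inv_step`), its post gives
`Bits` and DecodeRaw; its footprint through `KLoop.step'`; N(c) by `Codebook.SameFields.of_sameExcept_off`. -/
theorem segS {Lay : Layout} (hLay : Lay.hi = 0x1000000) {μ : Microarch} (hμ : UserX.MicroOK μ) {u₀ : State}
    (hcode : HasCodeNat Lay u₀ Vorbis.L.vorbis_decode_packet_rest.entry Vorbis.Code.code_vorbis_decode_packet_rest.nat Vorbis.L.vorbis_decode_packet_rest.size)
    (h_raw : ∀ (others : List Obj) (frames : List (Nat × FrameLayout)) (Blk : Block → Prop) (len : Nat), Calls Lay μ Vorbis.WayInv (Vorbis.conv u₀) Vorbis.L.codebook_decode_scalar_raw.entry (Vorbis.Spec.codebook_decode_scalar_raw.spec others frames Blk len))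
    (others : List Obj) (frames : List (Nat × FrameLayout)) (len : Nat) (Ar : Arena) (stored room : Int)
    (mode : Nat) (ysz : Nat → Nat) (e : State) (ret : Word) (i j k b : Nat) (v : State)
    (hat : AtSlow u₀ others frames len Ar stored room mode ysz e ret i j k b v) (hin : ArgsIn e) :
    ReachVia Lay μ Vorbis.WayInv v (fun w => AtVar u₀ others frames len Ar stored room mode ysz e ret i j k b w) := by
  have he := hat.entry
  v_entry he
  have w_rip := hat.rip
  have hrsp_v : v.reg .rsp = e.reg .rsp - 3000 := hat.rsp
  have w_kept : RegsKept [.rsp] v v := RegsKept.refl _ _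
  have w_eq : Mem.EqOn Vorbis.L.textLo Vorbis.L.textHi u₀.mem v.mem := hat.code
  have hdf : v.flags .df = false := (show abiInv _ from hat.abi).1
  have hmx : v.mxcsr &&& 0x1F80 = 0x1F80 := (show abiInv _ from hat.abi).2
  have hsse := Vorbis.sseOK_of_abiInv hat.abi
  have hraw := h_raw others (framesIn frames e) (RunBlk Ar len) len
  obtain ⟨hsh, hinv0, hargs⟩ := hat.pre
  have hinv := hat.inv
  have hok := hinv.ok
  have hL := hinv.live
  have hbits := hinv.fb.vorbis.bits
  have hi := hat.i_lt
  obtain ⟨f, hf⟩ : ∃ f : Nat, fOf e = f := ⟨_, rfl⟩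
  rw [hf] at hinv hbits hi
  have hrbp : v.reg .rbp = addr f := eq_addr _ _ (by rw [hat.rbp, hf])
  have hfoff := hinv.objOff
  have hfr := hbits.OBR
  simp only [voff] at hfoff hfr
  have hfw : f + 1808 ≤ 0xC00000 ∧ (f + 1808 ≤ 0x700000 ∨ 0x800000 ≤ f) := ⟨hfr.2, hfoff⟩
  clear hfoff
  have hfn : (addr f).toNat = f := toNat_addr f (by omega)
  -- the codebook
  obtain ⟨c, hc⟩ : ∃ c : Nat, stb_vorbis.codebooks_at v.mem f b = c := ⟨_, rfl⟩
  have hrbxn : (v.reg .rbx).toNat = c := by rw [hat.rbx, hf, hc]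
  have hrbx : v.reg .rbx = addr c := eq_addr _ _ hrbxn
  have hcb := hinv.fb.vorbis.codebooks
  have hblt : (b : Int) < stb_vorbis.codebook_count v.mem f := by
    rw [← hf]
    exact hat.book_lt
  obtain ⟨B, hB, hBin⟩ := CodebooksUpTo.book_in (groups_laws len) hcb hblt
  rw [hc] at hBin
  have hBoff := hinv.offStack B hB
  have hBins := hinv.ok.inside B hB
  simp only [vblock, voff] at hBin hBins
  have hcw : c + 2120 ≤ 0xC00000 ∧ (c + 2120 ≤ 0x700000 ∨ 0x800000 ≤ c) := by omega
  have hcn : (addr c).toNat = c := toNat_addr c (by omega)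
  have hapart := (hinv.books b hblt).book
  rw [hc] at hapart
  simp only [vblock, voff, Block.disjoint] at hapart
  clear hBoff hBins hBin
  u_walk hcode [hμ.vendor] until [cutVar] span [Vorbis.L.textLo, Vorbis.L.textHi] side (v_side)
  · v_inv
  · -- codebook_decode_scalar_raw's precondition
    have hun : ShadowUntouched v.mem s_110ca5.mem := by v_untouched
    have hsame1 : Mem.SameExcept [⟨(e.reg .rsp).toNat - 3856, (e.reg .rsp).toNat - 3000⟩] v.mem s_110ca5.mem := by
      u_same
    have hsame7 : Mem.SameExcept [⟨(e.reg .rsp).toNat - 3856, (e.reg .rsp).toNat - 3000⟩,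
        ⟨f + 48, f + 56⟩, ⟨f + 84, f + 96⟩, ⟨f + 136, f + 144⟩, ⟨f + 1484, f + 1749⟩,
        ⟨f + 1752, f + 1784⟩,
        ⟨stb_vorbis.finalY v.mem f i, stb_vorbis.finalY v.mem f i + ysz i⟩] v.mem s_110ca5.mem := by
      u_same
    have hb1 : Bits (RunBlk Ar len) len s_110ca5.mem f := Reader.bits_of_window hbits hsame1 (by omega)
    have hinv1 := seg4_inv_step hinv hi (by omega) (by omega) hsame7 hb1
    have e1 : (s_110ca5.reg .rsp).toNat + 8 = (spOf e).toNat := by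
      rw [w_rsp]
      u_omega
    have erdi : (s_110ca5.reg .rdi).toNat = f := by rw [w_rdi, hfn]
    have keep : ∀ (a : Nat) (n : Nat), f ≤ a → a + n ≤ f + 1808 →
        s_110ca5.mem.readLE (addr a) n = v.mem.readLE (addr a) n := by
      intro a n h1 h2
      have ea : (addr a).toNat = a := toNat_addr a (by omega)
      apply hsame1.readLE _ n (by omega)
      intro w hw
      have e2 : w = ⟨(e.reg .rsp).toNat - 3856, (e.reg .rsp).toNat - 3000⟩ := List.mem_singleton.mp hw
      subst e2
      simp only []
      omega
    have ecb : stb_vorbis.codebooks s_110ca5.mem f = stb_vorbis.codebooks v.mem f := by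
      simp only [vacc, voff]
      unfold Mem.u64
      exact keep _ 8 (by omega) (by omega)
    have ecc : stb_vorbis.codebook_count s_110ca5.mem f = stb_vorbis.codebook_count v.mem f := by
      simp only [vacc, voff]
      unfold Mem.i32 Mem.u32
      rw [keep _ 4 (by omega) (by omega)]
    have hsh1 : ShadowPre others (framesIn frames e) s_110ca5 := by
      refine ⟨?_, hsh.offText⟩
      rw [e1]
      exact hat.shadow.untouched hun
    apply PacketRestTest.bookPre_of_inv s_110ca5 b hsh1
    · rw [erdi]
      exact hinv1
    · rw [erdi, ecc]
      exact hblt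
    · rw [erdi, w_rsi, hcn]
      unfold stb_vorbis.codebooks_at
      rw [ecb]
      exact hc.symm
  · -- after codebook_decode_scalar_raw
    have c_rdi : (s_110ca5.reg .rdi).toNat = f := by rw [w_rdi_110ca5, hfn]
    have c_rsi : (s_110ca5.reg .rsi).toNat = c := by rw [w_rsi_110ca5, hcn]
    have hpb : Bits (RunBlk Ar len) len s_110ca5r.mem f := by
      have := w_post.reader.bits
      rw [c_rdi] at this
      exact this
    have hres : DecodeRawResult s_110ca5.mem c (argInt (s_110ca5r.reg .rax)) := by
      have := w_post.result
      rw [c_rsi] at this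
      exact this
    have hrax32 := w_post.hi
    obtain ⟨z, w_rax⟩ : ∃ z, s_110ca5r.reg .rax = z := ⟨_, rfl⟩
    rw [w_rax] at hres hrax32
    have hsf1 : Codebook.SameFields v.mem s_110ca5.mem c := by
      have hsame1 : Mem.SameExcept [⟨(e.reg .rsp).toNat - 3856, (e.reg .rsp).toNat - 3000⟩] v.mem s_110ca5.mem := by
        rw [w_mem_110ca5]
        u_same
      apply Codebook.SameFields.of_sameExcept_off hsame1 (by omega)
      intro w hw
      have e2 : w = ⟨(e.reg .rsp).toNat - 3856, (e.reg .rsp).toNat - 3000⟩ := List.mem_singleton.mp hw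
      subst e2
      simp only []
      omega
    v_after_call w_rsp_110ca5 w_mem_110ca5
    simp only [c_rdi] at w_same
    have hso : s_110ca5r.mem.readLE (e.reg .rsp - 3000 + 0x8) 4 = slot32 e v 0x8 := by
      have h0 : v.mem.readLE (e.reg .rsp - 3000 + 0x8) 4 = slot32 e v 0x8 := rfl
      u_frame h0
    have hsame6 : Mem.SameExcept [⟨(e.reg .rsp).toNat - 3856, (e.reg .rsp).toNat - 3000⟩,
        ⟨f + 48, f + 56⟩, ⟨f + 84, f + 96⟩, ⟨f + 136, f + 144⟩, ⟨f + 1484, f + 1749⟩,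
        ⟨f + 1752, f + 1784⟩] v.mem s_110ca5r.mem := by
      u_same
    have hsame : Mem.SameExcept [⟨(e.reg .rsp).toNat - 3856, (e.reg .rsp).toNat - 3000 + 12⟩,
        ⟨f + 48, f + 56⟩, ⟨f + 84, f + 96⟩, ⟨f + 136, f + 144⟩, ⟨f + 1484, f + 1749⟩,
        ⟨f + 1752, f + 1784⟩,
        ⟨stb_vorbis.finalY v.mem f i, stb_vorbis.finalY v.mem f i + ysz i⟩] v.mem s_110ca5r.mem := by
      u_same
    u_walk hcode [hμ.vendor] until [cutVar] span [Vorbis.L.textLo, Vorbis.L.textHi] side (v_side)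
    refine ReachVia.done ?_
    obtain ⟨hbody, ecb, ecc, ecd⟩ := hat.toKLoop.step' (k' := k) he_room he_top hin w_rsp w_eq
      (by show (Vorbis.conv u₀).inv _; v_inv)
      (by rw [w_kept .rbp rfl]; exact hat.rbp)
      (by rw [w_kept .r14 rfl]; exact hat.r14) hat.k_le
      (by rw [hf, w_mem]; exact hsame)
      (by
        show s_110caa.mem.readLE (e.reg .rsp - 3000 + 0x8) 4 = _
        rw [w_mem, hso]
        exact hat.slot_offset)
      (by rw [hf, w_mem]; exact hpb)
    have hsf : Codebook.SameFields v.mem s_110caa.mem c := by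
      rw [w_mem]
      apply Codebook.SameFields.of_sameExcept_off hsame6 (by omega)
      intro w hw
      simp only [List.mem_cons, List.mem_nil_iff, or_false] at hw
      rcases hw with rfl | rfl | rfl | rfl | rfl | rfl <;> simp only [] <;> omega
    have ecat : stb_vorbis.codebooks_at s_110caa.mem (fOf e) b = c := by
      unfold stb_vorbis.codebooks_at
      rw [ecb, hf]
      exact hc
    refine ⟨hbody, w_rip, by rw [ecd]; exact hat.k_lt, ?_, by rw [ecc]; exact hat.book_lt, ?_⟩
    · rw [ecat, w_kept .rbx rfl]
      exact hrbxn
    · rw [ecat, w_r12, Reader.ofBV_part32_of_lt z hrax32]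
      unfold DecodeRawResult at hres ⊢
      rw [hsf.N, ← hsf1.N]
      exact hres

/-! ### The sub-segments A and C from their parts -/

/-- **Sub-segment A, PROVED (under `ArgsIn`)**: `k = cdim` → the exit arm (`segA_exit`); `k < cdim` → the body (`segA_body`), whose
`book < 0` arm goes on through `segZ` to the loop head. -/
theorem segA {Lay : Layout} (hLay : Lay.hi = 0x1000000) {μ : Microarch} (hμ : UserX.MicroOK μ) {u₀ : State}
    (hcode : HasCodeNat Lay u₀ Vorbis.L.vorbis_decode_packet_rest.entry Vorbis.Code.code_vorbis_decode_packet_rest.nat Vorbis.L.vorbis_decode_packet_rest.size)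
    (hl2 : Asan.SmallCheck Lay μ Vorbis.WayInv (Vorbis.CodeOK u₀) [.rax, .rcx, .rdx] 2 Vorbis.L.__asan_load2_noabort.entry)
    (hs2 : Asan.SmallCheck Lay μ Vorbis.WayInv (Vorbis.CodeOK u₀) [.rax, .rcx, .rdx] 2 Vorbis.L.__asan_store2_noabort.entry) :
    SegA Lay μ u₀ := by
  intro others frames len Ar stored room mode ysz e ret i j k v hat hin
  by_cases hk : k = slot32 e v 0x10
  · refine (segA_exit hLay hμ hcode others frames len Ar stored room mode ysz e ret i j k v hat hin hk).trans ?_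
    intro w hw
    exact ReachVia.done (Or.inl hw)
  · have hlt : k < slot32 e v 0x10 := by
      have := hat.k_le
      omega
    refine (segA_body hLay hμ hcode hl2 others frames len Ar stored room mode ysz e ret i j k v hat hin hlt).trans ?_
    intro w hw
    rcases hw with hz | hb
    · refine (segZ hLay hμ hcode hs2 others frames len Ar stored room mode ysz e ret i j k w hz hin).trans ?_
      intro w' hw'
      exact ReachVia.done (Or.inr (Or.inl hw'))
    · exact ReachVia.done (Or.inr (Or.inr hb))

/-- **Sub-segment C, PROVED (under `ArgsIn`)**: the inline DECODE (`segC_fast`), its slow path through `segS`. -/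
theorem segC {Lay : Layout} (hLay : Lay.hi = 0x1000000) {μ : Microarch} (hμ : UserX.MicroOK μ) {u₀ : State}
    (hcode : HasCodeNat Lay u₀ Vorbis.L.vorbis_decode_packet_rest.entry Vorbis.Code.code_vorbis_decode_packet_rest.nat Vorbis.L.vorbis_decode_packet_rest.size)
    (h_raw : ∀ (others : List Obj) (frames : List (Nat × FrameLayout)) (Blk : Block → Prop) (len : Nat), Calls Lay μ Vorbis.WayInv (Vorbis.conv u₀) Vorbis.L.codebook_decode_scalar_raw.entry (Vorbis.Spec.codebook_decode_scalar_raw.spec others frames Blk len))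
    (hl1 : Asan.SmallCheck Lay μ Vorbis.WayInv (Vorbis.CodeOK u₀) [.rax, .rdx] 1 Vorbis.L.__asan_load1_noabort.entry)
    (hl2 : Asan.SmallCheck Lay μ Vorbis.WayInv (Vorbis.CodeOK u₀) [.rax, .rcx, .rdx] 2 Vorbis.L.__asan_load2_noabort.entry)
    (hl8 : Asan.SmallCheck Lay μ Vorbis.WayInv (Vorbis.CodeOK u₀) [.rax, .rcx, .rdx] 8 Vorbis.L.__asan_load8_noabort.entry)
    (hl4 : Asan.SmallCheck Lay μ Vorbis.WayInv (Vorbis.CodeOK u₀) [.rax, .rcx, .rdx] 4 Vorbis.L.__asan_load4_noabort.entry) :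
    SegC Lay μ u₀ := by
  intro others frames len Ar stored room mode ysz e ret i j k b v hat hin
  refine (segC_fast hLay hμ hcode hl1 hl2 hl8 hl4 others frames len Ar stored room mode ysz e ret i j k b v hat hin).trans ?_
  intro w hw
  rcases hw with hv | hs
  · exact ReachVia.done hv
  · exact segS hLay hμ hcode h_raw others frames len Ar stored room mode ysz e ret i j k b w hs hin

end Vorbis.Spec.vorbis_decode_packet_rest_4
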